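-- pv_equiv track=rewrite | github.com/tilaboy/work_note | algorithms/g_code_jam/kick_2021_B_longest_modified_equal_seq.py | get_longest
-- ===== SOURCE A (Python) =====
-- def get_longest(arr, n):
--     if n <= 3:
--         return len(arr)
--     # compute the diff segments
--     diffs = [arr[i] - arr[i + 1] for i in range(n - 1)]
--     n_diff = n - 1
--     i , nr_same, prev_diff= 0, 0, None
--     diff_segs = list()
--     while i < n_diff:
--         if prev_diff is not None:
--             if diffs[i] == prev_diff:
--                 nr_same += 1
--             else:
--                 diff_segs.append( (prev_diff, nr_same) )
--                 nr_same = 1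
--                 prev_diff = diffs[i]
--         else:
--             prev_diff = diffs[i]
--             nr_same += 1
--         i += 1
--     diff_segs.append( (prev_diff, nr_same) )
--     # compute the possible largest from current
--     nr_segs, i, best_prog = len(diff_segs), 0, 2
--     while i < nr_segs:
--         for_len_prog = back_len_prog = 0
--         if i + 2 < nr_segs:
--             if diff_segs[i+1][1] == 1 \
--             and (diff_segs[i+1][0] + diff_segs[i+2][0]) == 2 * diff_segs[i][0]:
--                 for_len_prog = diff_segs[i][1] + 2
--                 if i + 3 < nr_segs and diff_segs[i+2][1] == 1 and diff_segs[i][0] == diff_segs[i+3][0]: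
--                     for_len_prog += diff_segs[i + 3][1]
--         if i > 1:
--             if diff_segs[i-1][1] == 1 \
--             and (diff_segs[i-1][0] + diff_segs[i-2][0]) == 2 * diff_segs[i][0]:
--                 back_len_prog = diff_segs[i][1] + 2
--                 if i > 2 and diff_segs[i-2][1] == 1 and diff_segs[i][0] == diff_segs[i-3][0]:
--                      back_len_prog += diff_segs[i - 3][1]
--         for_len_prog = max(diff_segs[i][1] + 1, for_len_prog)
--         back_len_prog = max(diff_segs[i][1] + 1, back_len_prog)
--         best_prog = max(best_prog, for_len_prog, back_len_prog)
--         i += 1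
--     return min(best_prog + 1, n)
-- ===== SOURCE B (Python) =====
-- def get_longest(arr, n):
--     if n <= 3:
--         return len(arr)
--     d = [arr[k] - arr[k + 1] for k in range(n - 1)]
--     m = n - 1
--     left = _runs(d)
--     right = _runs(list(reversed(d)))[::-1]
--     best = 2
--     for k in range(m):
--         best = max(best, left[k] + 1)
--     for k in range(m - 1):
--         s = d[k] + d[k + 1]
--         if k >= 1 and s == 2 * d[k - 1]:
--             cand = left[k - 1] + 2
--             if k + 2 < m and d[k + 2] == d[k - 1]:
--                 cand += right[k + 2]
--             best = max(best, cand)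
--         if k + 2 < m and s == 2 * d[k + 2]:
--             cand = right[k + 2] + 2
--             if k >= 1 and d[k - 1] == d[k + 2]:
--                 cand += left[k - 1]
--             best = max(best, cand)
--     return min(best + 1, n)
--
--
-- def _runs(d):
--     runs, prev, cur = [], None, 0
--     for v in d:
--         cur = cur + 1 if v == prev else 1
--         runs.append(cur)
--         prev = v
--     return runs
-- ===== Notes on version B (the rewrite author's own statement) =====
-- stated objective: alternative
-- what changed: B drops A's run-length-encoded segment list entirely: it builds per-index prefix/suffix run arrays (left[k]/right[k] = length of the constant-difference run ending/starting at diff k) in two linear passes and then scans adjacent diff pairs once, bridging left and right runs at each candidate modification point, instead of A's while-loop RLE plus windowed lookups into the segment list in both directions.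
import Mathlib
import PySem

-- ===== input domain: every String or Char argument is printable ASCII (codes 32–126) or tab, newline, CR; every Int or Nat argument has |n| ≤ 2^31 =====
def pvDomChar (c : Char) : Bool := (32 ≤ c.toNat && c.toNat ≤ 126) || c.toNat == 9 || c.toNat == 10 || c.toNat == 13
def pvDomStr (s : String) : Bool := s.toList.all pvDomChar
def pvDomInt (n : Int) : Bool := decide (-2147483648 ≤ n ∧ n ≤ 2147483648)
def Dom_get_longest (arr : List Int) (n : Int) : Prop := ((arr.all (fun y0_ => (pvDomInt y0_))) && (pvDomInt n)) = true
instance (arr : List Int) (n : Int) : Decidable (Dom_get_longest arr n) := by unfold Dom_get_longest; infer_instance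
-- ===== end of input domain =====

-- B replaces A's run-length-encoded segment list and its two windowed segment scans by
-- per-index prefix/suffix run arrays plus one bridging scan over adjacent diff pairs
-- (objective: alternative, same O(n) cost).


-- ===== PORT A =====
-- arr[i] / diff_segs[i] reads, in range on every use admitted by Pre_get_longest
def pvGetI (xs : List Int) (i : Int) : Int := PySem.List.pyGetD xs i 0
def pvGetS (xs : List (Int × Int)) (i : Int) : Int × Int := PySem.List.pyGetD xs i (0, 0)

-- one iteration of A's RLE while-loop, on state (nr_same, prev_diff, diff_segs), fed diffs[i]
def pvRleStepA (st : Int × Option Int × List (Int × Int)) (d : Int) :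
    Int × Option Int × List (Int × Int) :=
  match st with
  | (nr_same, some p, segs) =>
      if d = p then (nr_same + 1, some p, segs)
      else (1, some d, segs ++ [(p, nr_same)])
  | (nr_same, none, segs) => (nr_same + 1, some d, segs)

def get_longest (arr : List Int) (n : Int) : Int :=
  if n ≤ 3 then (arr.length : Int)
  else
    let diffs := (PySem.List.pyRange 0 (n - 1) 1).map (fun i => pvGetI arr i - pvGetI arr (i + 1))
    let n_diff := n - 1
    let st := (PySem.List.pyRange 0 n_diff 1).foldl
        (fun st i => pvRleStepA st (pvGetI diffs i)) (0, none, [])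
    -- final append; prev_diff is an Int here on every input Pre_ admits (n ≥ 4)
    let diff_segs := st.2.2 ++ [(st.2.1.getD 0, st.1)]
    let nr_segs : Int := (diff_segs.length : Int)
    let best := (PySem.List.pyRange 0 nr_segs 1).foldl
        (fun best i =>
          let for_len : Int :=
            if i + 2 < nr_segs ∧ (pvGetS diff_segs (i + 1)).2 = 1 ∧
               (pvGetS diff_segs (i + 1)).1 + (pvGetS diff_segs (i + 2)).1
                 = 2 * (pvGetS diff_segs i).1 then
              (pvGetS diff_segs i).2 + 2 +
                (if i + 3 < nr_segs ∧ (pvGetS diff_segs (i + 2)).2 = 1 ∧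
                    (pvGetS diff_segs i).1 = (pvGetS diff_segs (i + 3)).1 then
                  (pvGetS diff_segs (i + 3)).2
                 else 0)
            else 0
          let back_len : Int :=
            if 1 < i ∧ (pvGetS diff_segs (i - 1)).2 = 1 ∧
               (pvGetS diff_segs (i - 1)).1 + (pvGetS diff_segs (i - 2)).1
                 = 2 * (pvGetS diff_segs i).1 then
              (pvGetS diff_segs i).2 + 2 +
                (if 2 < i ∧ (pvGetS diff_segs (i - 2)).2 = 1 ∧
                    (pvGetS diff_segs i).1 = (pvGetS diff_segs (i - 3)).1 then
                  (pvGetS diff_segs (i - 3)).2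
                 else 0)
            else 0
          max (max best (max ((pvGetS diff_segs i).2 + 1) for_len))
              (max ((pvGetS diff_segs i).2 + 1) back_len))
        2
    min (best + 1) n

-- ===== PORT B =====
-- one iteration of B's `_runs` loop, state (runs, prev, cur)
def pvRunsStep (st : List Int × Option Int × Int) (v : Int) : List Int × Option Int × Int :=
  let cur : Int := if st.2.1 = some v then st.2.2 + 1 else 1
  (st.1 ++ [cur], some v, cur)

def pvRuns (d : List Int) : List Int := (d.foldl pvRunsStep ([], none, 0)).1

def get_longest_alt (arr : List Int) (n : Int) : Int :=
  if n ≤ 3 then (arr.length : Int)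
  else
    let d := (PySem.List.pyRange 0 (n - 1) 1).map (fun k => pvGetI arr k - pvGetI arr (k + 1))
    let m := n - 1
    let left := pvRuns d
    -- list(reversed(d)) / [::-1] ported as List.reverse
    let right := (pvRuns d.reverse).reverse
    let best := (PySem.List.pyRange 0 m 1).foldl
        (fun best k => max best (pvGetI left k + 1)) 2
    let best := (PySem.List.pyRange 0 (m - 1) 1).foldl
        (fun best k =>
          let s := pvGetI d k + pvGetI d (k + 1)
          let best :=
            if 1 ≤ k ∧ s = 2 * pvGetI d (k - 1) then
              max best (pvGetI left (k - 1) + 2 +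
                (if k + 2 < m ∧ pvGetI d (k + 2) = pvGetI d (k - 1) then pvGetI right (k + 2)
                 else 0))
            else best
          if k + 2 < m ∧ s = 2 * pvGetI d (k + 2) then
            max best (pvGetI right (k + 2) + 2 +
              (if 1 ≤ k ∧ pvGetI d (k - 1) = pvGetI d (k + 2) then pvGetI left (k - 1) else 0))
          else best)
        best
    min (best + 1) n

-- ===== PRECONDITION & SPEC =====
-- Pre_ excludes exactly the inputs where A raises IndexError: n > 3 together with n > len(arr)
def Pre_get_longest (arr : List Int) (n : Int) : Prop := 3 < n → n ≤ (arr.length : Int)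
instance (arr : List Int) (n : Int) : Decidable (Pre_get_longest arr n) := by
  unfold Pre_get_longest; infer_instance

def pvWitness_get_longest : List Int × Int := ([1, 2, 3, 7, 5], 5)

def Spec_get_longest (arr : List Int) (n : Int) (out : Int) : Prop := out = get_longest_alt arr n
instance (arr : List Int) (n : Int) (out : Int) : Decidable (Spec_get_longest arr n out) := by
  unfold Spec_get_longest; infer_instance

-- ===== CLAIM (what is proved, stated in full; the proofs are below) =====
def Claim_equal_get_longest : Prop := ∀ (arr : List Int) (n : Int), Dom_get_longest arr n →
  Pre_get_longest arr n → Spec_get_longest arr n (get_longest arr n)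

-- ===== LEMMAS AND PROOFS =====

-- ---------- proof-level helpers: structural RLE ----------

-- old-style RLE step on Int-count segments (bridge between A's loop state and pvRle)
def pvRleStep (segs : List (Int × Int)) (d : Int) : List (Int × Int) :=
  match segs.getLast? with
  | some (d0, c0) => if d0 = d then segs.dropLast ++ [(d, c0 + 1)] else segs ++ [(d, 1)]
  | none => segs ++ [(d, 1)]

-- A's RLE loop with the pending segment flushed equals the pvRleStep fold
theorem pv_rle_inv (dl : List Int) : ∀ (c p : Int) (done : List (Int × Int)),
    (dl.foldl pvRleStepA (c, some p, done)).2.2 ++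
      [((dl.foldl pvRleStepA (c, some p, done)).2.1.getD 0, (dl.foldl pvRleStepA (c, some p, done)).1)]
    = dl.foldl pvRleStep (done ++ [(p, c)]) := by
  induction dl with
  | nil => intro c p done; simp
  | cons d t ih =>
    intro c p done
    simp only [List.foldl_cons]
    by_cases hd : d = p
    · have hA : pvRleStepA (c, some p, done) d = (c + 1, some p, done) := by
        simp [pvRleStepA, hd]
      have hB : pvRleStep (done ++ [(p, c)]) d = done ++ [(p, c + 1)] := by
        subst hd
        simp [pvRleStep]
      rw [hA, hB]
      exact ih (c + 1) p done
    · have hA : pvRleStepA (c, some p, done) d = (1, some d, done ++ [(p, c)]) := by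
        simp [pvRleStepA, hd]
      have hB : pvRleStep (done ++ [(p, c)]) d = (done ++ [(p, c)]) ++ [(d, 1)] := by
        have : p ≠ d := fun h => hd h.symm
        simp [pvRleStep, this]
      rw [hA, hB]
      exact ih 1 d (done ++ [(p, c)])

theorem pv_rle_eq (d : Int) (t : List Int) :
    ((d :: t).foldl pvRleStepA (0, none, [])).2.2 ++
      [(((d :: t).foldl pvRleStepA (0, none, [])).2.1.getD 0, ((d :: t).foldl pvRleStepA (0, none, [])).1)]
    = (d :: t).foldl pvRleStep [] := by
  have hA : pvRleStepA (0, none, []) d = (1, some d, ([] : List (Int × Int))) := by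
    simp [pvRleStepA]
  have hB : pvRleStep ([] : List (Int × Int)) d = [(d, 1)] := by
    simp [pvRleStep]
  simp only [List.foldl_cons, hA, hB]
  exact pv_rle_inv t 1 d []

-- structural (Nat-count) run-length encoding
def pvHead (d : Int) (T : List (Int × Nat)) : List (Int × Nat) :=
  match T with
  | [] => [(d, 1)]
  | (d', c) :: r => if d = d' then (d, c + 1) :: r else (d, 1) :: (d', c) :: r

def pvRle : List Int → List (Int × Nat)
  | [] => []
  | d :: t => pvHead d (pvRle t)

def pvSnoc (T : List (Int × Nat)) (x : Int) : List (Int × Nat) :=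
  match T.getLast? with
  | some dc => if dc.1 = x then T.dropLast ++ [(dc.1, dc.2 + 1)] else T ++ [(x, 1)]
  | none => [(x, 1)]

def pvMapInt (T : List (Int × Nat)) : List (Int × Int) :=
  T.map (fun p => (p.1, (p.2 : Int)))

def pvExpand1 (p : Int × Nat) : List Int := List.replicate p.2 p.1

theorem pvRle_ne_nil (d : Int) (t : List Int) : pvRle (d :: t) ≠ [] := by
  show pvHead d (pvRle t) ≠ []
  cases h : pvRle t with
  | nil => simp [pvHead]
  | cons p r =>
    cases p with
    | mk d' c => by_cases hd : d = d' <;> simp [pvHead, hd]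

theorem pvRle_nil_of (t : List Int) (h : pvRle t = []) : t = [] := by
  cases t with
  | nil => rfl
  | cons d t => exact absurd h (pvRle_ne_nil d t)

theorem pvSnoc_cons_cons (p q : Int × Nat) (r : List (Int × Nat)) (x : Int) :
    pvSnoc (p :: q :: r) x = p :: pvSnoc (q :: r) x := by
  unfold pvSnoc
  rw [List.getLast?_cons_cons]
  cases h : (q :: r).getLast? with
  | none => simp at h
  | some dc =>
    by_cases hd : dc.1 = x <;> simp [hd, List.dropLast_cons_of_ne_nil]

theorem pvRle_snoc (t : List Int) (x : Int) : pvRle (t ++ [x]) = pvSnoc (pvRle t) x := by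
  induction t with
  | nil => simp [pvRle, pvHead, pvSnoc]
  | cons d t ih =>
    have lhs : pvRle ((d :: t) ++ [x]) = pvHead d (pvRle (t ++ [x])) := rfl
    have rhs : pvRle (d :: t) = pvHead d (pvRle t) := rfl
    rw [lhs, ih, rhs]
    cases h : pvRle t with
    | nil =>
      by_cases hd : d = x <;>
        simp [pvHead, pvSnoc, hd] <;> by_cases hx : x = d <;> simp_all
    | cons p r =>
      cases p with
      | mk d' c =>
        cases r with
        | nil =>
          by_cases h2 : d' = x
          · subst h2
            by_cases hd : d = d' <;> simp [pvHead, pvSnoc, hd]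
          · have hsx : pvSnoc [(d', c)] x = [(d', c), (x, 1)] := by simp [pvSnoc, h2]
            by_cases hd : d = d'
            · have hdx : ¬ d = x := fun hh => h2 (hd ▸ hh ▸ rfl)
              simp [pvHead, hsx, hd, pvSnoc, h2, hdx]
            · simp [pvHead, hsx, hd, pvSnoc, h2]
        | cons q r' =>
          have h1 : pvSnoc ((d', c) :: q :: r') x = (d', c) :: pvSnoc (q :: r') x :=
            pvSnoc_cons_cons _ _ _ _
          rw [h1]
          by_cases hd : d = d'
          · have e1 : pvHead d ((d', c) :: pvSnoc (q :: r') x)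
                = (d, c + 1) :: pvSnoc (q :: r') x := by simp [pvHead, hd]
            have e2 : pvHead d ((d', c) :: q :: r') = (d, c + 1) :: q :: r' := by
              simp [pvHead, hd]
            rw [e1, e2, pvSnoc_cons_cons]
          · have e1 : pvHead d ((d', c) :: pvSnoc (q :: r') x)
                = (d, 1) :: (d', c) :: pvSnoc (q :: r') x := by simp [pvHead, hd]
            have e2 : pvHead d ((d', c) :: q :: r') = (d, 1) :: (d', c) :: q :: r' := by
              simp [pvHead, hd]
            rw [e1, e2, pvSnoc_cons_cons, pvSnoc_cons_cons]

theorem pvRleStep_mapInt (T : List (Int × Nat)) (x : Int) :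
    pvRleStep (pvMapInt T) x = pvMapInt (pvSnoc T x) := by
  unfold pvRleStep pvSnoc pvMapInt
  rw [List.getLast?_map]
  cases h : T.getLast? with
  | none =>
    have hT : T = [] := List.getLast?_eq_none_iff.mp h
    subst hT
    simp
  | some dc =>
    by_cases hd : dc.1 = x
    · simp [hd, List.map_append, List.map_dropLast]
    · simp [hd, List.map_append]

theorem pvRleFold_eq (dl : List Int) : dl.foldl pvRleStep [] = pvMapInt (pvRle dl) := by
  induction dl using List.reverseRecOn with
  | nil => rfl
  | append_singleton t x ih =>
    rw [List.foldl_append, List.foldl_cons, List.foldl_nil, ih, pvRleStep_mapInt, pvRle_snoc]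

theorem pvRle_expand (dl : List Int) : (pvRle dl).flatMap pvExpand1 = dl := by
  induction dl with
  | nil => rfl
  | cons d t ih =>
    show (pvHead d (pvRle t)).flatMap pvExpand1 = d :: t
    cases h : pvRle t with
    | nil =>
      have ht : t = [] := pvRle_nil_of t h
      subst ht
      simp [pvHead, pvExpand1]
    | cons p r =>
      cases p with
      | mk d' c =>
        rw [h] at ih
        by_cases hd : d = d'
        · have h3 : pvHead d ((d', c) :: r) = (d, c + 1) :: r := by simp [pvHead, hd]
          rw [h3]
          simp only [List.flatMap_cons, pvExpand1] at ih ⊢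
          rw [List.replicate_succ, hd]
          simp [ih]
        · have h3 : pvHead d ((d', c) :: r) = (d, 1) :: (d', c) :: r := by simp [pvHead, hd]
          rw [h3]
          simp only [List.flatMap_cons, pvExpand1] at ih ⊢
          simp [ih]

theorem pvRle_pos (dl : List Int) : ∀ p ∈ pvRle dl, 0 < p.2 := by
  induction dl with
  | nil => intro p hp; simp [pvRle] at hp
  | cons d t ih =>
    intro p hp
    have hp' : p ∈ pvHead d (pvRle t) := hp
    cases h : pvRle t with
    | nil => rw [h] at hp'; simp [pvHead] at hp'; simp [hp']
    | cons q r =>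
      cases q with
      | mk d' c =>
        rw [h] at ih hp'
        by_cases hd : d = d'
        · rw [pvHead, if_pos hd] at hp'
          rcases List.mem_cons.mp hp' with h1 | h1
          · simp [h1]
          · exact ih p (List.mem_cons_of_mem _ h1)
        · rw [pvHead, if_neg hd] at hp'
          rcases List.mem_cons.mp hp' with h1 | h1
          · simp [h1]
          · exact ih p h1

theorem pv_chain_shift {p q : Int × Nat} {r : List (Int × Nat)}
    (h : List.IsChain (fun a b : Int × Nat => a.1 ≠ b.1) (p :: r)) (hpq : p.1 = q.1) :
    List.IsChain (fun a b : Int × Nat => a.1 ≠ b.1) (q :: r) := by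
  cases r with
  | nil => exact List.isChain_singleton q
  | cons s r' =>
    rw [List.isChain_cons_cons] at h ⊢
    exact ⟨hpq ▸ h.1, h.2⟩

theorem pvRle_chain (dl : List Int) :
    List.IsChain (fun a b : Int × Nat => a.1 ≠ b.1) (pvRle dl) := by
  induction dl with
  | nil => exact List.isChain_nil
  | cons d t ih =>
    show List.IsChain _ (pvHead d (pvRle t))
    cases h : pvRle t with
    | nil => exact List.isChain_singleton _
    | cons q r =>
      cases q with
      | mk d' c =>
        rw [h] at ih
        by_cases hd : d = d'
        · have h3 : pvHead d ((d', c) :: r) = (d, c + 1) :: r := by simp [pvHead, hd]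
          rw [h3]
          exact pv_chain_shift ih hd.symm
        · have h3 : pvHead d ((d', c) :: r) = (d, 1) :: (d', c) :: r := by simp [pvHead, hd]
          rw [h3]
          exact List.isChain_cons_cons.mpr ⟨hd, ih⟩

-- ---------- proof-level helpers: per-index run lengths ----------

def pvLr (dl : List Int) : Nat → Int
  | 0 => 1
  | k + 1 => if dl.getD (k + 1) 0 = dl.getD k 0 then pvLr dl k + 1 else 1

def pvRr (dl : List Int) (k : Nat) : Int := pvLr dl.reverse (dl.length - 1 - k)

theorem pvLr_append (d : List Int) (v : Int) : ∀ (k : Nat), k < d.length →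
    pvLr (d ++ [v]) k = pvLr d k := by
  intro k
  induction k with
  | zero => intro _; rfl
  | succ j ih =>
    intro hk
    have h1 : (d ++ [v]).getD (j + 1) 0 = d.getD (j + 1) 0 := by
      rw [List.getD_append _ _ _ _ hk]
    have h2 : (d ++ [v]).getD j 0 = d.getD j 0 := by
      rw [List.getD_append _ _ _ _ (by omega)]
    rw [pvLr, h1, h2, ih (by omega)]
    rfl

theorem pvRuns_state (d : List Int) :
    d.foldl pvRunsStep ([], none, 0) =
      ((List.range d.length).map (pvLr d), d.getLast?,
        if d.length = 0 then 0 else pvLr d (d.length - 1)) := by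
  induction d using List.reverseRecOn with
  | nil => simp
  | append_singleton t v ih =>
    rw [List.foldl_append, List.foldl_cons, List.foldl_nil, ih]
    have hmap : (List.range (t ++ [v]).length).map (pvLr (t ++ [v]))
        = (List.range t.length).map (pvLr t) ++ [pvLr (t ++ [v]) t.length] := by
      rw [List.length_append, List.length_singleton, List.range_succ, List.map_append,
        List.map_singleton]
      congr 1
      exact List.map_congr_left (fun k hk => pvLr_append t v k (List.mem_range.mp hk))
    have hcur : (if (t ++ [v]).length = 0 then 0 else pvLr (t ++ [v]) ((t ++ [v]).length - 1))
        = pvLr (t ++ [v]) t.length := by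
      simp
    rw [hmap, hcur]
    cases t using List.reverseRecOn with
    | nil =>
      simp [pvRunsStep]
      rfl
    | append_singleton t' u =>
      have hlast : (t' ++ [u]).getLast? = some u := by simp
      have hLrval : pvLr ((t' ++ [u]) ++ [v]) (t' ++ [u]).length =
          if u = v then (if (t' ++ [u]).length = 0 then 0
            else pvLr (t' ++ [u]) ((t' ++ [u]).length - 1)) + 1 else 1 := by
        have hlen : (t' ++ [u]).length = t'.length + 1 := by simp
        rw [hlen]
        show pvLr ((t' ++ [u]) ++ [v]) (t'.length + 1) = _
        have hg1 : ((t' ++ [u]) ++ [v]).getD (t'.length + 1) 0 = v := by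
          have e : t'.length + 1 = ((t' ++ [u]) ++ [v]).length - 1 := by simp
          rw [e]
          simp [List.getD_eq_getElem?_getD]
        have hg2 : ((t' ++ [u]) ++ [v]).getD t'.length 0 = u := by
          rw [List.getD_append _ _ _ _ (by simp)]
          simp [List.getD_eq_getElem?_getD]
        rw [pvLr, hg1, hg2, pvLr_append _ _ _ (by simp)]
        by_cases huv : u = v
        · subst huv
          simp
        · have hvu : ¬ v = u := fun hh => huv hh.symm
          simp [huv, hvu]
      simp only [pvRunsStep, hlast, Option.some.injEq, Prod.mk.injEq]
      refine ⟨?_, by simp, ?_⟩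
      · rw [hLrval]
      · rw [hLrval]

theorem pvRuns_eq (d : List Int) : pvRuns d = (List.range d.length).map (pvLr d) := by
  unfold pvRuns
  rw [pvRuns_state]

theorem pvRuns_getD (d : List Int) (k : Nat) (hk : k < d.length) :
    (pvRuns d).getD k 0 = pvLr d k := by
  rw [pvRuns_eq, List.getD_eq_getElem?_getD, List.getElem?_map, List.getElem?_range hk]
  rfl

theorem pvRight_getD (d : List Int) (k : Nat) (hk : k < d.length) :
    ((pvRuns d.reverse).reverse).getD k 0 = pvRr d k := by
  rw [pvRuns_eq, List.length_reverse]
  have hk2 : k < ((List.range d.length).map (pvLr d.reverse)).reverse.length := by simp [hk]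
  rw [List.getD_eq_getElem _ _ hk2, List.getElem_reverse]
  have hlen : ((List.range d.length).map (pvLr d.reverse)).length = d.length := by simp
  simp only [hlen]
  rw [List.getElem_map, List.getElem_range]
  rfl


-- ---------- segment positions inside the diff list ----------

def pvStart (T : List (Int × Nat)) (i : Nat) : Nat := ((T.take i).map Prod.snd).sum

theorem pvStart_zero (T : List (Int × Nat)) : pvStart T 0 = 0 := rfl

theorem pvStart_cons_succ (p : Int × Nat) (r : List (Int × Nat)) (i : Nat) :
    pvStart (p :: r) (i + 1) = p.2 + pvStart r i := by
  unfold pvStart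
  rw [List.take_succ_cons]
  simp

theorem pvStart_succ (T : List (Int × Nat)) (i : Nat) (hi : i < T.length) :
    pvStart T (i + 1) = pvStart T i + (T.getD i (0, 0)).2 := by
  unfold pvStart
  rw [List.map_take, List.map_take, List.sum_take_succ _ i (by simpa using hi)]
  congr 1
  rw [List.getElem_map, List.getD_eq_getElem _ _ hi]

theorem pvStart_total (T : List (Int × Nat)) (i : Nat) (hi : T.length ≤ i) :
    pvStart T i = (T.map Prod.snd).sum := by
  unfold pvStart
  rw [List.take_of_length_le hi]

theorem pvStart_le_sum (T : List (Int × Nat)) (i : Nat) :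
    pvStart T i ≤ (T.map Prod.snd).sum := by
  unfold pvStart
  rw [List.map_take]
  have h := List.sum_take_add_sum_drop (T.map Prod.snd) i
  omega

theorem pvStart_mono (T : List (Int × Nat)) {i j : Nat} (h : i ≤ j) :
    pvStart T i ≤ pvStart T j := by
  have h1 : T.take i = (T.take j).take i := by
    rw [List.take_take, Nat.min_eq_left h]
  show ((T.take i).map Prod.snd).sum ≤ _
  rw [h1]
  exact pvStart_le_sum (T.take j) i

theorem pv_expand_length (T : List (Int × Nat)) :
    (T.flatMap pvExpand1).length = (T.map Prod.snd).sum := by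
  induction T with
  | nil => rfl
  | cons p r ih => simp [pvExpand1, ih]

theorem pv_getD_expand (T : List (Int × Nat)) : ∀ (i t : Nat), i < T.length →
    t < (T.getD i (0, 0)).2 →
    (T.flatMap pvExpand1).getD (pvStart T i + t) 0 = (T.getD i (0, 0)).1 := by
  induction T with
  | nil => intro i t hi; exact absurd hi (by simp)
  | cons p r ih =>
    intro i t hi ht
    cases i with
    | zero =>
      have hg : (p :: r).getD 0 (0, 0) = p := rfl
      rw [hg] at ht ⊢
      show (pvExpand1 p ++ r.flatMap pvExpand1).getD (pvStart (p :: r) 0 + t) 0 = p.1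
      rw [pvStart_zero, Nat.zero_add,
        List.getD_append _ _ _ _ (by simpa [pvExpand1] using ht)]
      exact List.getD_replicate p.1 ht
    | succ i' =>
      have hi' : i' < r.length := by simpa using hi
      have hg : (p :: r).getD (i' + 1) (0, 0) = r.getD i' (0, 0) := rfl
      rw [hg] at ht ⊢
      show (pvExpand1 p ++ r.flatMap pvExpand1).getD (pvStart (p :: r) (i' + 1) + t) 0 = _
      rw [pvStart_cons_succ, Nat.add_assoc,
        List.getD_append_right _ _ _ _ (by simp [pvExpand1])]
      have he : p.2 + (pvStart r i' + t) - (pvExpand1 p).length = pvStart r i' + t := by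
        simp [pvExpand1]
      rw [he]
      exact ih i' t hi' ht

theorem pv_index_decomp (T : List (Int × Nat)) (hpos : ∀ p ∈ T, 0 < p.2) :
    ∀ (k : Nat), k < (T.map Prod.snd).sum →
      ∃ i t, i < T.length ∧ t < (T.getD i (0, 0)).2 ∧ k = pvStart T i + t := by
  induction T with
  | nil => intro k hk; simp at hk
  | cons p r ih =>
    intro k hk
    by_cases hkp : k < p.2
    · exact ⟨0, k, by simp, by simpa using hkp, by rw [pvStart_zero]; omega⟩
    · have hk' : k - p.2 < (r.map Prod.snd).sum := by
        simp only [List.map_cons, List.sum_cons] at hk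
        omega
      obtain ⟨i, t, hi, ht, hkit⟩ := ih (fun q hq => hpos q (List.mem_cons_of_mem _ hq)) (k - p.2) hk'
      refine ⟨i + 1, t, by simpa using hi, by simpa using ht, ?_⟩
      rw [pvStart_cons_succ]
      omega

theorem pv_chain_ne (T : List (Int × Nat))
    (hchain : List.IsChain (fun a b : Int × Nat => a.1 ≠ b.1) T) (i : Nat)
    (h : i + 1 < T.length) : (T.getD i (0, 0)).1 ≠ (T.getD (i + 1) (0, 0)).1 := by
  rw [List.getD_eq_getElem _ _ (by omega), List.getD_eq_getElem _ _ h]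
  exact List.isChain_iff_getElem.mp hchain i h

theorem pvLr_seg (T : List (Int × Nat))
    (hchain : List.IsChain (fun a b : Int × Nat => a.1 ≠ b.1) T)
    (hpos : ∀ p ∈ T, 0 < p.2) (i : Nat) (hi : i < T.length) :
    ∀ (t : Nat), t < (T.getD i (0, 0)).2 →
      pvLr (T.flatMap pvExpand1) (pvStart T i + t) = (t : Int) + 1 := by
  intro t
  induction t with
  | zero =>
    intro _
    cases i with
    | zero =>
      simp only [pvStart_zero, Nat.add_zero, Nat.cast_zero, zero_add]
      rfl
    | succ i' =>
      have hi' : i' < T.length := by omega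
      have hc' : 0 < (T.getD i' (0, 0)).2 := by
        rw [List.getD_eq_getElem _ _ hi']
        exact hpos _ (T.getElem_mem hi')
      have hs : pvStart T (i' + 1) = (pvStart T i' + ((T.getD i' (0, 0)).2 - 1)) + 1 := by
        rw [pvStart_succ T i' hi']
        omega
      rw [Nat.add_zero, hs, pvLr]
      have hg1 : (T.flatMap pvExpand1).getD (pvStart T i' + ((T.getD i' (0, 0)).2 - 1) + 1) 0
          = (T.getD (i' + 1) (0, 0)).1 := by
        rw [← hs, ← Nat.add_zero (pvStart T (i' + 1))]
        exact pv_getD_expand T (i' + 1) 0 hi (by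
          rw [List.getD_eq_getElem _ _ hi]
          exact hpos _ (T.getElem_mem hi))
      have hg2 : (T.flatMap pvExpand1).getD (pvStart T i' + ((T.getD i' (0, 0)).2 - 1)) 0
          = (T.getD i' (0, 0)).1 :=
        pv_getD_expand T i' _ hi' (by omega)
      rw [hg1, hg2, if_neg (Ne.symm (pv_chain_ne T hchain i' hi))]
      simp
  | succ t' iht =>
    intro ht
    have hg1 : (T.flatMap pvExpand1).getD (pvStart T i + (t' + 1)) 0 = (T.getD i (0, 0)).1 :=
      pv_getD_expand T i (t' + 1) hi ht
    have hg2 : (T.flatMap pvExpand1).getD (pvStart T i + t') 0 = (T.getD i (0, 0)).1 :=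
      pv_getD_expand T i t' hi (by omega)
    have he : pvStart T i + (t' + 1) = (pvStart T i + t') + 1 := by omega
    rw [he, pvLr, hg2]
    rw [show pvStart T i + t' + 1 = pvStart T i + (t' + 1) from by omega, hg1, if_pos rfl,
      iht (by omega)]
    push_cast
    ring

-- ---------- reversal: suffix run lengths ----------

theorem pv_expand_reverse (T : List (Int × Nat)) :
    (T.reverse).flatMap pvExpand1 = (T.flatMap pvExpand1).reverse := by
  induction T with
  | nil => rfl
  | cons p r ih =>
    rw [List.reverse_cons, List.flatMap_append, ih]
    simp [pvExpand1]

theorem pv_chain_reverse (T : List (Int × Nat))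
    (hchain : List.IsChain (fun a b : Int × Nat => a.1 ≠ b.1) T) :
    List.IsChain (fun a b : Int × Nat => a.1 ≠ b.1) T.reverse :=
  List.isChain_reverse.mpr (hchain.imp fun _ _ h => Ne.symm h)

theorem pvStart_reverse (T : List (Int × Nat)) (i : Nat) :
    pvStart T.reverse i = (T.map Prod.snd).sum - pvStart T (T.length - i) := by
  unfold pvStart
  rw [List.map_take, List.map_take, List.map_reverse, List.take_reverse, List.sum_reverse]
  have h1 := List.sum_take_add_sum_drop (T.map Prod.snd) (T.length - i)
  have h2 : (T.map Prod.snd).length = T.length := by simp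
  have h3 : (T.map Prod.snd).length - i = T.length - i := by omega
  rw [h3]
  omega

theorem pvRr_seg (T : List (Int × Nat))
    (hchain : List.IsChain (fun a b : Int × Nat => a.1 ≠ b.1) T)
    (hpos : ∀ p ∈ T, 0 < p.2) (i : Nat) (hi : i < T.length) (t : Nat)
    (ht : t < (T.getD i (0, 0)).2) :
    pvRr (T.flatMap pvExpand1) (pvStart T i + t) = ((T.getD i (0, 0)).2 : Int) - t := by
  have hrevE := pv_expand_reverse T
  have hlenE := pv_expand_length T
  have hsum_i := pvStart_succ T i hi
  have hle := pvStart_le_sum T (i + 1)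
  have hgetrev : T.reverse.getD (T.length - 1 - i) (0, 0) = T.getD i (0, 0) := by
    have h1 : T.length - 1 - i < T.reverse.length := by simp; omega
    rw [List.getD_eq_getElem _ _ h1, List.getElem_reverse, List.getD_eq_getElem _ _ (by
      simp at h1 ⊢; omega)]
    congr 1
    omega
  have hstartrev : pvStart T.reverse (T.length - 1 - i) + ((T.getD i (0, 0)).2 - 1 - t)
      = (T.flatMap pvExpand1).length - 1 - (pvStart T i + t) := by
    rw [pvStart_reverse, hlenE]
    have : T.length - (T.length - 1 - i) = i + 1 := by omega
    rw [this]
    omega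
  have hseg := pvLr_seg T.reverse (pv_chain_reverse T hchain)
    (fun p hp => hpos p (List.mem_reverse.mp hp)) (T.length - 1 - i)
    (by simp; omega) ((T.getD i (0, 0)).2 - 1 - t)
    (by rw [hgetrev]; omega)
  unfold pvRr
  rw [← hrevE, ← hstartrev, hseg]
  omega

-- ---------- window form of A's per-segment scores ----------

def pvScore (d0 c0 : Int) (rest : List (Int × Int)) : Int :=
  match rest with
  | (d1, _c1) :: (d2, c2) :: r =>
      if _c1 = 1 ∧ d1 + d2 = 2 * d0 then
        c0 + 2 +
          (match r with
           | (d3, c3) :: _ => if c2 = 1 ∧ d0 = d3 then c3 else 0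
           | [] => 0)
      else c0 + 1
  | _ => c0 + 1

def pvF (S : List (Int × Int)) (j : Nat) : Int :=
  pvScore (S.getD j (0, 0)).1 (S.getD j (0, 0)).2 (S.drop (j + 1))

def pvG (S : List (Int × Int)) (j : Nat) : Int :=
  pvScore (S.getD j (0, 0)).1 (S.getD j (0, 0)).2 ((S.take j).reverse)

theorem pv_score_core (d0 c0 : Int) (rest : List (Int × Int)) (hc0 : 1 ≤ c0)
    (hpos : ∀ x ∈ rest, 1 ≤ x.2) :
    max (c0 + 1)
      (if 2 ≤ rest.length ∧ (rest.getD 0 (0, 0)).2 = 1 ∧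
          (rest.getD 0 (0, 0)).1 + (rest.getD 1 (0, 0)).1 = 2 * d0 then
        c0 + 2 +
          (if 3 ≤ rest.length ∧ (rest.getD 1 (0, 0)).2 = 1 ∧ d0 = (rest.getD 2 (0, 0)).1 then
            (rest.getD 2 (0, 0)).2
           else 0)
       else 0)
    = pvScore d0 c0 rest := by
  rcases rest with _ | ⟨⟨d1, c1⟩, _ | ⟨⟨d2, c2⟩, _ | ⟨⟨d3, c3⟩, t⟩⟩⟩
  · simp only [pvScore]; simp; omega
  · simp only [pvScore]; simp; omega
  · simp only [pvScore, List.getD, List.length_cons]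
    split_ifs <;> simp_all <;> omega
  · have hc3 : 1 ≤ c3 := hpos (d3, c3) (by simp)
    simp only [pvScore, List.getD, List.length_cons]
    split_ifs <;> simp_all <;> omega

theorem pv_getD_drop (S : List (Int × Int)) (k m : Nat) :
    (S.drop k).getD m (0, 0) = S.getD (k + m) (0, 0) := by
  simp [List.getD_eq_getElem?_getD, List.getElem?_drop]

theorem pv_getD_take_rev (S : List (Int × Int)) (j m : Nat) (hm : m < j) (hj : j ≤ S.length) :
    ((S.take j).reverse).getD m (0, 0) = S.getD (j - 1 - m) (0, 0) := by
  have hlen : (S.take j).length = j := by simp [hj]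
  have hm' : m < (S.take j).length := by omega
  rw [List.getD_eq_getElem?_getD, List.getElem?_reverse hm', List.getD_eq_getElem?_getD]
  rw [hlen]
  rw [List.getElem?_take_of_lt (by omega)]

theorem pvF_win (S : List (Int × Int)) (hpos : ∀ x ∈ S, 1 ≤ x.2) (j : Nat) (hj : j < S.length) :
    pvF S j = max ((S.getD j (0, 0)).2 + 1)
      (if j + 2 < S.length ∧ (S.getD (j + 1) (0, 0)).2 = 1 ∧
          (S.getD (j + 1) (0, 0)).1 + (S.getD (j + 2) (0, 0)).1 = 2 * (S.getD j (0, 0)).1 then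
        (S.getD j (0, 0)).2 + 2 +
          (if j + 3 < S.length ∧ (S.getD (j + 2) (0, 0)).2 = 1 ∧
              (S.getD j (0, 0)).1 = (S.getD (j + 3) (0, 0)).1 then (S.getD (j + 3) (0, 0)).2
           else 0)
       else 0) := by
  have hc0 : 1 ≤ (S.getD j (0, 0)).2 := by
    rw [List.getD_eq_getElem _ _ hj]
    exact hpos _ (S.getElem_mem hj)
  have hrest : ∀ x ∈ S.drop (j + 1), 1 ≤ x.2 := fun x hx => hpos x (List.mem_of_mem_drop hx)
  rw [pvF, ← pv_score_core (S.getD j (0, 0)).1 (S.getD j (0, 0)).2 (S.drop (j + 1)) hc0 hrest]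
  have g2 : (2 ≤ (S.drop (j + 1)).length) = (j + 2 < S.length) :=
    propext (by rw [List.length_drop]; omega)
  have g3 : (3 ≤ (S.drop (j + 1)).length) = (j + 3 < S.length) :=
    propext (by rw [List.length_drop]; omega)
  have n1 : j + 1 + 0 = j + 1 := by omega
  have n2 : j + 1 + 1 = j + 2 := by omega
  have n3 : j + 1 + 2 = j + 3 := by omega
  simp only [pv_getD_drop, g2, g3, n1, n2, n3]

theorem pvG_win (S : List (Int × Int)) (hpos : ∀ x ∈ S, 1 ≤ x.2) (j : Nat) (hj : j < S.length) :
    pvG S j = max ((S.getD j (0, 0)).2 + 1)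
      (if 2 ≤ j ∧ (S.getD (j - 1) (0, 0)).2 = 1 ∧
          (S.getD (j - 1) (0, 0)).1 + (S.getD (j - 2) (0, 0)).1 = 2 * (S.getD j (0, 0)).1 then
        (S.getD j (0, 0)).2 + 2 +
          (if 3 ≤ j ∧ (S.getD (j - 2) (0, 0)).2 = 1 ∧
              (S.getD j (0, 0)).1 = (S.getD (j - 3) (0, 0)).1 then (S.getD (j - 3) (0, 0)).2
           else 0)
       else 0) := by
  have hc0 : 1 ≤ (S.getD j (0, 0)).2 := by
    rw [List.getD_eq_getElem _ _ hj]
    exact hpos _ (S.getElem_mem hj)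
  have hrest : ∀ x ∈ (S.take j).reverse, 1 ≤ x.2 := fun x hx =>
    hpos x (List.mem_of_mem_take (List.mem_reverse.mp hx))
  rw [pvG, ← pv_score_core (S.getD j (0, 0)).1 (S.getD j (0, 0)).2 ((S.take j).reverse) hc0 hrest]
  have hg2 : (2 ≤ ((S.take j).reverse).length) = (2 ≤ j) :=
    propext (by simp [List.length_take]; omega)
  have hg3 : (3 ≤ ((S.take j).reverse).length) = (3 ≤ j) :=
    propext (by simp [List.length_take]; omega)
  by_cases h2 : 2 ≤ j
  · have r0 := pv_getD_take_rev S j 0 (by omega) (le_of_lt hj)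
    have r1 := pv_getD_take_rev S j 1 (by omega) (le_of_lt hj)
    have n0 : j - 1 - 0 = j - 1 := by omega
    have n1 : j - 1 - 1 = j - 2 := by omega
    by_cases h3 : 3 ≤ j
    · have r2 := pv_getD_take_rev S j 2 (by omega) (le_of_lt hj)
      have n2 : j - 1 - 2 = j - 3 := by omega
      simp only [r0, r1, r2, n0, n1, n2, hg2, hg3]
    · have hins : ∀ (p q : Prop), ((3 ≤ j) ∧ p ∧ q) = False :=
        fun p q => eq_false (fun h => h3 h.1)
      simp only [r0, r1, n0, n1, hg2, hg3, hins, if_false]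
  · have hins : ∀ (p q : Prop), ((2 ≤ j) ∧ p ∧ q) = False :=
      fun p q => eq_false (fun h => h2 h.1)
    simp only [hg2, hg3, hins, if_false]

-- ---------- fold-max utilities and the two candidate lists ----------

theorem pv_foldl_two (F G : Nat → Int) (l : List Nat) (b : Int) :
    l.foldl (fun b k => max (max b (F k)) (G k)) b
      = (l.flatMap (fun k => [F k, G k])).foldl max b := by
  induction l generalizing b with
  | nil => rfl
  | cons k t ih =>
    simp only [List.foldl_cons, List.flatMap_cons, List.cons_append,
      List.foldl_append, List.foldl_cons, List.foldl_nil]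
    exact ih _

theorem pv_foldl_max_le (l : List Int) (b c : Int) (hb : b ≤ c) (h : ∀ x ∈ l, x ≤ c) :
    l.foldl max b ≤ c := by
  induction l generalizing b with
  | nil => exact hb
  | cons x t ih =>
    exact ih _ (max_le hb (h x (List.mem_cons_self))) (fun y hy => h y (List.mem_cons_of_mem _ hy))

theorem pv_foldl_max_eq (l1 l2 : List Int) (b : Int)
    (h1 : ∀ x ∈ l1, x ≤ l2.foldl max b) (h2 : ∀ x ∈ l2, x ≤ l1.foldl max b) :
    l1.foldl max b = l2.foldl max b :=
  le_antisymm (pv_foldl_max_le _ _ _ (PySem.List.le_foldl_max l2 b).1 h1)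
    (pv_foldl_max_le _ _ _ (PySem.List.le_foldl_max l1 b).1 h2)

theorem pv_foldl_inv_congr {α β : Type} (P : β → Prop) (f g : β → α → β) :
    ∀ (l : List α) (b : β), P b → (∀ b a, a ∈ l → P b → f b a = g b a) →
      (∀ b a, P b → P (g b a)) → l.foldl f b = l.foldl g b := by
  intro l
  induction l with
  | nil => intro b _ _ _; rfl
  | cons x t ih =>
    intro b hb hfg hg
    simp only [List.foldl_cons]
    rw [hfg b x (List.mem_cons_self) hb]
    exact ih _ (hg b x hb) (fun b a ha hb' => hfg b a (List.mem_cons_of_mem _ ha) hb') hg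

def pvX (dl : List Int) (k : Nat) : Int :=
  if 1 ≤ k ∧ dl.getD k 0 + dl.getD (k + 1) 0 = 2 * dl.getD (k - 1) 0 then
    pvLr dl (k - 1) + 2 +
      (if k + 2 < dl.length ∧ dl.getD (k + 2) 0 = dl.getD (k - 1) 0 then pvRr dl (k + 2) else 0)
  else 2

def pvY (dl : List Int) (k : Nat) : Int :=
  if k + 2 < dl.length ∧ dl.getD k 0 + dl.getD (k + 1) 0 = 2 * dl.getD (k + 2) 0 then
    pvRr dl (k + 2) + 2 +
      (if 1 ≤ k ∧ dl.getD (k - 1) 0 = dl.getD (k + 2) 0 then pvLr dl (k - 1) else 0)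
  else 2

def pvLB (dl : List Int) : List Int :=
  (List.range dl.length).map (fun k => pvLr dl k + 1) ++
    (List.range (dl.length - 1)).flatMap (fun k => [pvX dl k, pvY dl k])

def pvLA (S : List (Int × Int)) : List Int :=
  (List.range S.length).flatMap (fun j => [pvF S j, pvG S j])

theorem pv_mem_LB_base (dl : List Int) (k : Nat) (hk : k < dl.length) :
    pvLr dl k + 1 ∈ pvLB dl :=
  List.mem_append_left _ (List.mem_map.mpr ⟨k, List.mem_range.mpr hk, rfl⟩)

theorem pv_mem_LB_X (dl : List Int) (k : Nat) (hk : k < dl.length - 1) :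
    pvX dl k ∈ pvLB dl :=
  List.mem_append_right _ (List.mem_flatMap.mpr ⟨k, List.mem_range.mpr hk, by simp⟩)

theorem pv_mem_LB_Y (dl : List Int) (k : Nat) (hk : k < dl.length - 1) :
    pvY dl k ∈ pvLB dl :=
  List.mem_append_right _ (List.mem_flatMap.mpr ⟨k, List.mem_range.mpr hk, by simp⟩)

theorem pv_mem_LA_F (S : List (Int × Int)) (j : Nat) (hj : j < S.length) :
    pvF S j ∈ pvLA S :=
  List.mem_flatMap.mpr ⟨j, List.mem_range.mpr hj, by simp⟩

theorem pv_mem_LA_G (S : List (Int × Int)) (j : Nat) (hj : j < S.length) :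
    pvG S j ∈ pvLA S :=
  List.mem_flatMap.mpr ⟨j, List.mem_range.mpr hj, by simp⟩

-- ---------- small bridging facts ----------

theorem pv_cpos (T : List (Int × Nat)) (hpos : ∀ p ∈ T, 0 < p.2) (i : Nat) (hi : i < T.length) :
    0 < (T.getD i (0, 0)).2 := by
  rw [List.getD_eq_getElem _ _ hi]
  exact hpos _ (T.getElem_mem hi)

theorem pvS_len (T : List (Int × Nat)) : (pvMapInt T).length = T.length := by
  simp [pvMapInt]

theorem pvS_getD (T : List (Int × Nat)) (j : Nat) (hj : j < T.length) :
    (pvMapInt T).getD j (0, 0) = ((T.getD j (0, 0)).1, ((T.getD j (0, 0)).2 : Int)) := by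
  unfold pvMapInt
  rw [List.getD_eq_getElem _ _ (by simpa using hj), List.getElem_map, List.getD_eq_getElem _ _ hj]

theorem pvS_fst (T : List (Int × Nat)) (j : Nat) (hj : j < T.length) :
    ((pvMapInt T).getD j (0, 0)).1 = (T.getD j (0, 0)).1 := by
  rw [pvS_getD T j hj]

theorem pvS_snd (T : List (Int × Nat)) (j : Nat) (hj : j < T.length) :
    ((pvMapInt T).getD j (0, 0)).2 = ((T.getD j (0, 0)).2 : Int) := by
  rw [pvS_getD T j hj]

theorem pvS_pos (T : List (Int × Nat)) (hpos : ∀ p ∈ T, 0 < p.2) :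
    ∀ x ∈ pvMapInt T, 1 ≤ x.2 := by
  intro x hx
  obtain ⟨p, hp, rfl⟩ := List.mem_map.mp hx
  simpa using hpos p hp

theorem pv_start_lt (T : List (Int × Nat)) (i : Nat)
    (hlt : pvStart T i < (T.map Prod.snd).sum) : i < T.length := by
  by_contra h
  rw [pvStart_total T i (by omega)] at hlt
  omega

-- ---------- the chain addend, forward form ----------

theorem pv_chainF (T : List (Int × Nat))
    (hchain : List.IsChain (fun a b : Int × Nat => a.1 ≠ b.1) T)
    (hpos : ∀ p ∈ T, 0 < p.2) (j : Nat) (hj2 : j + 2 < T.length)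
    (hc1 : (T.getD (j + 1) (0, 0)).2 = 1)
    (hbr : (T.getD (j + 1) (0, 0)).1 + (T.getD (j + 2) (0, 0)).1 = 2 * (T.getD j (0, 0)).1) :
    (if pvStart T (j + 1) + 2 < (T.flatMap pvExpand1).length ∧
        (T.flatMap pvExpand1).getD (pvStart T (j + 1) + 2) 0 = (T.getD j (0, 0)).1 then
      pvRr (T.flatMap pvExpand1) (pvStart T (j + 1) + 2) else 0)
    = (if j + 3 < (pvMapInt T).length ∧ ((pvMapInt T).getD (j + 2) (0, 0)).2 = 1 ∧
        ((pvMapInt T).getD j (0, 0)).1 = ((pvMapInt T).getD (j + 3) (0, 0)).1 then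
        ((pvMapInt T).getD (j + 3) (0, 0)).2 else 0) := by
  have hlen : (T.flatMap pvExpand1).length = (T.map Prod.snd).sum := pv_expand_length T
  have hS := pvS_len T
  have hs2 : pvStart T (j + 2) = pvStart T (j + 1) + 1 := by
    rw [pvStart_succ T (j + 1) (by omega), hc1]
  by_cases hc2 : (T.getD (j + 2) (0, 0)).2 = 1
  · have hs3 : pvStart T (j + 3) = pvStart T (j + 1) + 2 := by
      rw [pvStart_succ T (j + 2) hj2, hs2, hc2]
    by_cases h3 : j + 3 < T.length
    · have hget : (T.flatMap pvExpand1).getD (pvStart T (j + 1) + 2) 0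
          = (T.getD (j + 3) (0, 0)).1 := by
        rw [← hs3, ← Nat.add_zero (pvStart T (j + 3))]
        exact pv_getD_expand T (j + 3) 0 h3 (pv_cpos T hpos (j + 3) h3)
      have hlt : pvStart T (j + 1) + 2 < (T.flatMap pvExpand1).length := by
        have h4 := pvStart_succ T (j + 3) h3
        have h5 := pvStart_le_sum T (j + 3 + 1)
        have h6 := pv_cpos T hpos (j + 3) h3
        omega
      have hRr : pvRr (T.flatMap pvExpand1) (pvStart T (j + 1) + 2)
          = ((T.getD (j + 3) (0, 0)).2 : Int) := by
        rw [← hs3, ← Nat.add_zero (pvStart T (j + 3))]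
        have := pvRr_seg T hchain hpos (j + 3) h3 0 (pv_cpos T hpos (j + 3) h3)
        rw [this]
        omega
      rw [pvS_snd T (j + 2) hj2, pvS_fst T j (by omega), pvS_fst T (j + 3) h3,
        pvS_snd T (j + 3) h3]
      by_cases heq : (T.getD j (0, 0)).1 = (T.getD (j + 3) (0, 0)).1
      · rw [if_pos ⟨hlt, by rw [hget, heq]⟩,
          if_pos ⟨by rw [hS]; omega, by exact_mod_cast hc2, heq⟩, hRr]
      · rw [if_neg (fun hcon => heq (hget.symm.trans hcon.2).symm),
          if_neg (fun hcon => heq hcon.2.2)]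
    · have htot : pvStart T (j + 3) = (T.map Prod.snd).sum := pvStart_total T (j + 3) (by omega)
      rw [if_neg (fun hcon => by rw [hlen] at hcon; omega),
        if_neg (fun hcon => by rw [hS] at hcon; omega)]
  · have hcp := pv_cpos T hpos (j + 2) hj2
    have hgetB : (T.flatMap pvExpand1).getD (pvStart T (j + 1) + 2) 0
        = (T.getD (j + 2) (0, 0)).1 := by
      rw [show pvStart T (j + 1) + 2 = pvStart T (j + 2) + 1 from by omega]
      exact pv_getD_expand T (j + 2) 1 hj2 (by omega)
    have hne := pv_chain_ne T hchain (j + 1) hj2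
    rw [show j + 1 + 1 = j + 2 from by omega] at hne
    rw [if_neg (fun hcon => by
        have h1 : (T.getD (j + 2) (0, 0)).1 = (T.getD j (0, 0)).1 := hgetB.symm.trans hcon.2
        exact hne (by omega)),
      if_neg (fun hcon => hc2 (by
        rw [pvS_snd T (j + 2) hj2] at hcon
        exact_mod_cast hcon.2.1))]

-- ---------- the chain addend, backward form ----------

theorem pv_chainG (T : List (Int × Nat))
    (hchain : List.IsChain (fun a b : Int × Nat => a.1 ≠ b.1) T)
    (hpos : ∀ p ∈ T, 0 < p.2) (j k : Nat) (hj : j < T.length) (h2j : 2 ≤ j)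
    (hc1 : (T.getD (j - 1) (0, 0)).2 = 1)
    (hbr : (T.getD (j - 1) (0, 0)).1 + (T.getD (j - 2) (0, 0)).1 = 2 * (T.getD j (0, 0)).1)
    (hk1 : k + 1 = pvStart T (j - 1)) :
    (if 1 ≤ k ∧ (T.flatMap pvExpand1).getD (k - 1) 0 = (T.getD j (0, 0)).1 then
      pvLr (T.flatMap pvExpand1) (k - 1) else 0)
    = (if 3 ≤ j ∧ ((pvMapInt T).getD (j - 2) (0, 0)).2 = 1 ∧
        ((pvMapInt T).getD j (0, 0)).1 = ((pvMapInt T).getD (j - 3) (0, 0)).1 then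
        ((pvMapInt T).getD (j - 3) (0, 0)).2 else 0) := by
  obtain ⟨j2, rfl⟩ : ∃ j2, j = j2 + 2 := ⟨j - 2, by omega⟩
  have n1 : j2 + 2 - 1 = j2 + 1 := by omega
  have n2 : j2 + 2 - 2 = j2 := by omega
  have n3 : j2 + 2 - 3 = j2 - 1 := by omega
  rw [n1] at hc1 hk1
  rw [n1, n2] at hbr
  rw [n2, n3]
  have hj1 : j2 + 1 < T.length := by omega
  have hj0 : j2 < T.length := by omega
  have hs1 := pvStart_succ T j2 hj0
  have hcj2 := pv_cpos T hpos j2 hj0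
  by_cases hc2 : (T.getD j2 (0, 0)).2 = 1
  · have hk0 : k = pvStart T j2 := by omega
    by_cases h1 : 1 ≤ j2
    · have hs0 : pvStart T j2 = pvStart T (j2 - 1) + (T.getD (j2 - 1) (0, 0)).2 := by
        have h := pvStart_succ T (j2 - 1) (by omega)
        rw [show j2 - 1 + 1 = j2 from by omega] at h
        exact h
      have hcjm := pv_cpos T hpos (j2 - 1) (by omega)
      have hkm : k - 1 = pvStart T (j2 - 1) + ((T.getD (j2 - 1) (0, 0)).2 - 1) := by omega
      have hgkm : (T.flatMap pvExpand1).getD (k - 1) 0 = (T.getD (j2 - 1) (0, 0)).1 := by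
        rw [hkm]
        exact pv_getD_expand T (j2 - 1) _ (by omega) (by omega)
      have hLr : pvLr (T.flatMap pvExpand1) (k - 1) = ((T.getD (j2 - 1) (0, 0)).2 : Int) := by
        rw [hkm, pvLr_seg T hchain hpos (j2 - 1) (by omega) _ (by omega)]
        omega
      rw [pvS_snd T j2 hj0, pvS_fst T (j2 + 2) hj, pvS_fst T (j2 - 1) (by omega),
        pvS_snd T (j2 - 1) (by omega)]
      by_cases heq : (T.getD (j2 + 2) (0, 0)).1 = (T.getD (j2 - 1) (0, 0)).1
      · rw [if_pos ⟨by omega, by rw [hgkm, heq]⟩,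
          if_pos ⟨by omega, by exact_mod_cast hc2, heq⟩, hLr]
      · rw [if_neg (fun hcon => heq (hgkm.symm.trans hcon.2).symm),
          if_neg (fun hcon => heq hcon.2.2)]
    · have hj20 : j2 = 0 := by omega
      have hk00 : k = 0 := by
        rw [hk0, hj20, pvStart_zero]
      rw [if_neg (fun hcon => by omega), if_neg (fun hcon => by omega)]
  · have hkm : k - 1 = pvStart T j2 + ((T.getD j2 (0, 0)).2 - 2) := by omega
    have hgkm : (T.flatMap pvExpand1).getD (k - 1) 0 = (T.getD j2 (0, 0)).1 := by
      rw [hkm]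
      exact pv_getD_expand T j2 _ hj0 (by omega)
    have hne := pv_chain_ne T hchain (j2 + 1) (by omega)
    rw [show j2 + 1 + 1 = j2 + 2 from by omega] at hne
    have hgk : (T.flatMap pvExpand1).getD (pvStart T (j2 + 1) + 0) 0
        = (T.getD (j2 + 1) (0, 0)).1 :=
      pv_getD_expand T (j2 + 1) 0 hj1 (pv_cpos T hpos (j2 + 1) hj1)
    rw [if_neg (fun hcon => by
        have h1 : (T.getD j2 (0, 0)).1 = (T.getD (j2 + 2) (0, 0)).1 := hgkm.symm.trans hcon.2
        exact hne (by omega)),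
      if_neg (fun hcon => hc2 (by
        rw [pvS_snd T j2 hj0] at hcon
        exact_mod_cast hcon.2.1))]

-- ---------- the four candidate bounds ----------

theorem pv_base_le_F (T : List (Int × Nat)) (hpos : ∀ p ∈ T, 0 < p.2) (j : Nat)
    (hj : j < T.length) :
    ((pvMapInt T).getD j (0, 0)).2 + 1 ≤ pvF (pvMapInt T) j := by
  rw [pvF_win (pvMapInt T) (pvS_pos T hpos) j (by rw [pvS_len]; exact hj)]
  exact le_max_left _ _

theorem pv_base_le (T : List (Int × Nat))
    (hchain : List.IsChain (fun a b : Int × Nat => a.1 ≠ b.1) T)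
    (hpos : ∀ p ∈ T, 0 < p.2) (j : Nat) (hj : j < T.length) :
    ((pvMapInt T).getD j (0, 0)).2 + 1 ≤ (pvLB (T.flatMap pvExpand1)).foldl max 2 := by
  have hlen := pv_expand_length T
  have hcp := pv_cpos T hpos j hj
  have hsucc := pvStart_succ T j hj
  have hle := pvStart_le_sum T (j + 1)
  have hkl : pvStart T j + ((T.getD j (0, 0)).2 - 1) < (T.flatMap pvExpand1).length := by omega
  have hLr : pvLr (T.flatMap pvExpand1) (pvStart T j + ((T.getD j (0, 0)).2 - 1))
      = ((T.getD j (0, 0)).2 : Int) := by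
    rw [pvLr_seg T hchain hpos j hj _ (by omega)]
    omega
  rw [pvS_snd T j hj]
  have hmem := pv_mem_LB_base (T.flatMap pvExpand1) _ hkl
  have := (PySem.List.le_foldl_max (pvLB (T.flatMap pvExpand1)) 2).2 _ hmem
  rw [hLr] at this
  exact this

theorem pv_A1 (T : List (Int × Nat))
    (hchain : List.IsChain (fun a b : Int × Nat => a.1 ≠ b.1) T)
    (hpos : ∀ p ∈ T, 0 < p.2) (j : Nat) (hj : j < T.length) :
    pvF (pvMapInt T) j ≤ (pvLB (T.flatMap pvExpand1)).foldl max 2 := by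
  have hS := pvS_len T
  have hlen := pv_expand_length T
  rw [pvF_win (pvMapInt T) (pvS_pos T hpos) j (by rw [hS]; exact hj)]
  apply max_le
  · exact pv_base_le T hchain hpos j hj
  · by_cases hb : j + 2 < (pvMapInt T).length ∧ ((pvMapInt T).getD (j + 1) (0, 0)).2 = 1 ∧
        ((pvMapInt T).getD (j + 1) (0, 0)).1 + ((pvMapInt T).getD (j + 2) (0, 0)).1
          = 2 * ((pvMapInt T).getD j (0, 0)).1
    · obtain ⟨hb1, hb2, hb3⟩ := hb
      rw [hS] at hb1
      rw [pvS_snd T (j + 1) (by omega)] at hb2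
      rw [pvS_fst T (j + 1) (by omega), pvS_fst T (j + 2) hb1, pvS_fst T j (by omega)] at hb3
      have hc1 : (T.getD (j + 1) (0, 0)).2 = 1 := by exact_mod_cast hb2
      have hbrT : (T.getD (j + 1) (0, 0)).1 + (T.getD (j + 2) (0, 0)).1
          = 2 * (T.getD j (0, 0)).1 := hb3
      rw [if_pos ⟨by rw [hS]; omega, by rw [pvS_snd T (j + 1) (by omega)]; exact_mod_cast hc1,
        by rw [pvS_fst T (j + 1) (by omega), pvS_fst T (j + 2) hb1, pvS_fst T j (by omega)]
           exact hbrT⟩]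
      rw [← pv_chainF T hchain hpos j hb1 hc1 hbrT]
      rw [pvS_snd T j (by omega)]
      have hsucc := pvStart_succ T j (by omega)
      have hcj := pv_cpos T hpos j (by omega)
      have hcj1 := pv_cpos T hpos (j + 1) (by omega)
      have hgk : (T.flatMap pvExpand1).getD (pvStart T (j + 1)) 0
          = (T.getD (j + 1) (0, 0)).1 := by
        rw [← Nat.add_zero (pvStart T (j + 1))]
        exact pv_getD_expand T (j + 1) 0 (by omega) (by omega)
      have hs2 : pvStart T (j + 2) = pvStart T (j + 1) + 1 := by
        rw [pvStart_succ T (j + 1) (by omega), hc1]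
      have hcj2 := pv_cpos T hpos (j + 2) hb1
      have hgk1 : (T.flatMap pvExpand1).getD (pvStart T (j + 1) + 1) 0
          = (T.getD (j + 2) (0, 0)).1 := by
        rw [← hs2, ← Nat.add_zero (pvStart T (j + 2))]
        exact pv_getD_expand T (j + 2) 0 hb1 (by omega)
      have hgkm : (T.flatMap pvExpand1).getD (pvStart T (j + 1) - 1) 0
          = (T.getD j (0, 0)).1 := by
        rw [show pvStart T (j + 1) - 1 = pvStart T j + ((T.getD j (0, 0)).2 - 1) from by omega]
        exact pv_getD_expand T j _ (by omega) (by omega)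
      have hLrm : pvLr (T.flatMap pvExpand1) (pvStart T (j + 1) - 1)
          = ((T.getD j (0, 0)).2 : Int) := by
        rw [show pvStart T (j + 1) - 1 = pvStart T j + ((T.getD j (0, 0)).2 - 1) from by omega,
          pvLr_seg T hchain hpos j (by omega) _ (by omega)]
        omega
      have hXeq : pvX (T.flatMap pvExpand1) (pvStart T (j + 1))
          = ((T.getD j (0, 0)).2 : Int) + 2 +
            (if pvStart T (j + 1) + 2 < (T.flatMap pvExpand1).length ∧
                (T.flatMap pvExpand1).getD (pvStart T (j + 1) + 2) 0 = (T.getD j (0, 0)).1 then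
              pvRr (T.flatMap pvExpand1) (pvStart T (j + 1) + 2) else 0) := by
        unfold pvX
        rw [if_pos ⟨by omega, by rw [hgk, hgk1, hgkm]; exact hbrT⟩, hLrm, hgkm]
      have hkbound : pvStart T (j + 1) < (T.flatMap pvExpand1).length - 1 := by
        have h7 := pvStart_succ T (j + 2) hb1
        have h8 := pvStart_le_sum T (j + 2 + 1)
        omega
      have hmem := pv_mem_LB_X (T.flatMap pvExpand1) _ hkbound
      have hle2 := (PySem.List.le_foldl_max (pvLB (T.flatMap pvExpand1)) 2).2 _ hmem
      rw [hXeq] at hle2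
      exact hle2
    · rw [if_neg hb]
      have := (PySem.List.le_foldl_max (pvLB (T.flatMap pvExpand1)) 2).1
      omega

theorem pv_A2 (T : List (Int × Nat))
    (hchain : List.IsChain (fun a b : Int × Nat => a.1 ≠ b.1) T)
    (hpos : ∀ p ∈ T, 0 < p.2) (j : Nat) (hj : j < T.length) :
    pvG (pvMapInt T) j ≤ (pvLB (T.flatMap pvExpand1)).foldl max 2 := by
  have hS := pvS_len T
  have hlen := pv_expand_length T
  rw [pvG_win (pvMapInt T) (pvS_pos T hpos) j (by rw [hS]; exact hj)]
  apply max_le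
  · exact pv_base_le T hchain hpos j hj
  · by_cases hb : 2 ≤ j ∧ ((pvMapInt T).getD (j - 1) (0, 0)).2 = 1 ∧
        ((pvMapInt T).getD (j - 1) (0, 0)).1 + ((pvMapInt T).getD (j - 2) (0, 0)).1
          = 2 * ((pvMapInt T).getD j (0, 0)).1
    · obtain ⟨hb1, hb2, hb3⟩ := hb
      rw [pvS_snd T (j - 1) (by omega)] at hb2
      rw [pvS_fst T (j - 1) (by omega), pvS_fst T (j - 2) (by omega), pvS_fst T j hj] at hb3
      have hc1 : (T.getD (j - 1) (0, 0)).2 = 1 := by exact_mod_cast hb2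
      have hbrT : (T.getD (j - 1) (0, 0)).1 + (T.getD (j - 2) (0, 0)).1
          = 2 * (T.getD j (0, 0)).1 := hb3
      rw [if_pos ⟨hb1, by rw [pvS_snd T (j - 1) (by omega)]; exact_mod_cast hc1,
        by rw [pvS_fst T (j - 1) (by omega), pvS_fst T (j - 2) (by omega), pvS_fst T j hj]
           exact hbrT⟩]
      -- the single-diff kink sits at position k with k + 1 = pvStart T (j-1)
      have hT0 : 0 < T.length := by omega
      have hst1 : pvStart T 1 = (T.getD 0 (0, 0)).2 := by
        have h := pvStart_succ T 0 hT0
        rw [pvStart_zero, show (0 : Nat) + 1 = 1 from by omega] at h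
        omega
      have hc0 := pv_cpos T hpos 0 hT0
      have hpos1 : 1 ≤ pvStart T (j - 1) := by
        have := pvStart_mono T (show 1 ≤ j - 1 from by omega)
        omega
      have hk1 : (pvStart T (j - 1) - 1) + 1 = pvStart T (j - 1) := by omega
      have hsm1 : pvStart T j = pvStart T (j - 1) + 1 := by
        have h := pvStart_succ T (j - 1) (by omega)
        rw [show j - 1 + 1 = j from by omega, hc1] at h
        exact h
      have hcj := pv_cpos T hpos j hj
      have hcjm2 := pv_cpos T hpos (j - 2) (by omega)
      have hsm2 : pvStart T (j - 1) = pvStart T (j - 2) + (T.getD (j - 2) (0, 0)).2 := by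
        have h := pvStart_succ T (j - 2) (by omega)
        rw [show j - 2 + 1 = j - 1 from by omega] at h
        exact h
      have hgk2 : (T.flatMap pvExpand1).getD ((pvStart T (j - 1) - 1) + 2) 0
          = (T.getD j (0, 0)).1 := by
        rw [show (pvStart T (j - 1) - 1) + 2 = pvStart T j + 0 from by omega]
        exact pv_getD_expand T j 0 hj (by omega)
      have hgk1 : (T.flatMap pvExpand1).getD ((pvStart T (j - 1) - 1) + 1) 0
          = (T.getD (j - 1) (0, 0)).1 := by
        rw [show (pvStart T (j - 1) - 1) + 1 = pvStart T (j - 1) + 0 from by omega]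
        exact pv_getD_expand T (j - 1) 0 (by omega) (by omega)
      have hgk0 : (T.flatMap pvExpand1).getD (pvStart T (j - 1) - 1) 0
          = (T.getD (j - 2) (0, 0)).1 := by
        rw [show pvStart T (j - 1) - 1 = pvStart T (j - 2) + ((T.getD (j - 2) (0, 0)).2 - 1)
          from by omega]
        exact pv_getD_expand T (j - 2) _ (by omega) (by omega)
      have hRr : pvRr (T.flatMap pvExpand1) ((pvStart T (j - 1) - 1) + 2)
          = ((T.getD j (0, 0)).2 : Int) := by
        rw [show (pvStart T (j - 1) - 1) + 2 = pvStart T j + 0 from by omega,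
          pvRr_seg T hchain hpos j hj 0 (by omega)]
        omega
      have hk2len : (pvStart T (j - 1) - 1) + 2 < (T.flatMap pvExpand1).length := by
        have h7 := pvStart_succ T j hj
        have h8 := pvStart_le_sum T (j + 1)
        omega
      have hYeq : pvY (T.flatMap pvExpand1) (pvStart T (j - 1) - 1)
          = ((T.getD j (0, 0)).2 : Int) + 2 +
            (if 1 ≤ pvStart T (j - 1) - 1 ∧
                (T.flatMap pvExpand1).getD (pvStart T (j - 1) - 1 - 1) 0
                  = (T.getD j (0, 0)).1 then
              pvLr (T.flatMap pvExpand1) (pvStart T (j - 1) - 1 - 1) else 0) := by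
        unfold pvY
        rw [if_pos ⟨hk2len, by rw [hgk0, hgk1, hgk2]; omega⟩, hRr, hgk2]
      have hchainG := pv_chainG T hchain hpos j (pvStart T (j - 1) - 1) hj hb1 hc1 hbrT
        (by omega)
      rw [← hchainG, pvS_snd T j hj, ← hYeq]
      have hkbound : pvStart T (j - 1) - 1 < (T.flatMap pvExpand1).length - 1 := by
        have h7 := pvStart_succ T j hj
        have h8 := pvStart_le_sum T (j + 1)
        omega
      exact (PySem.List.le_foldl_max (pvLB (T.flatMap pvExpand1)) 2).2 _
        (pv_mem_LB_Y (T.flatMap pvExpand1) _ hkbound)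
    · rw [if_neg hb]
      have := (PySem.List.le_foldl_max (pvLB (T.flatMap pvExpand1)) 2).1
      omega

theorem pv_B1 (T : List (Int × Nat))
    (hchain : List.IsChain (fun a b : Int × Nat => a.1 ≠ b.1) T)
    (hpos : ∀ p ∈ T, 0 < p.2) (k : Nat) (hk : k < (T.flatMap pvExpand1).length) :
    pvLr (T.flatMap pvExpand1) k + 1 ≤ (pvLA (pvMapInt T)).foldl max 2 := by
  have hlen := pv_expand_length T
  have hS := pvS_len T
  obtain ⟨i, t, hi, ht, rfl⟩ := pv_index_decomp T hpos k (by omega)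
  rw [pvLr_seg T hchain hpos i hi t ht]
  have hbase := pv_base_le_F T hpos i hi
  rw [pvS_getD T i hi] at hbase
  have hfold := (PySem.List.le_foldl_max (pvLA (pvMapInt T)) 2).2 _
    (pv_mem_LA_F (pvMapInt T) i (by rw [hS]; exact hi))
  have hcast : (t : Int) + 1 + 1 ≤ ((T.getD i (0, 0)).2 : Int) + 1 := by omega
  omega

theorem pv_B2 (T : List (Int × Nat))
    (hchain : List.IsChain (fun a b : Int × Nat => a.1 ≠ b.1) T)
    (hpos : ∀ p ∈ T, 0 < p.2) (k : Nat) (hk : k < (T.flatMap pvExpand1).length - 1) :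
    pvX (T.flatMap pvExpand1) k ≤ (pvLA (pvMapInt T)).foldl max 2 := by
  have hlen := pv_expand_length T
  have hS := pvS_len T
  have hinit := (PySem.List.le_foldl_max (pvLA (pvMapInt T)) 2).1
  unfold pvX
  by_cases hc : 1 ≤ k ∧ (T.flatMap pvExpand1).getD k 0 + (T.flatMap pvExpand1).getD (k + 1) 0
      = 2 * (T.flatMap pvExpand1).getD (k - 1) 0
  case neg => rw [if_neg hc]; omega
  rw [if_pos hc]
  obtain ⟨hk1, hbr⟩ := hc
  obtain ⟨i, t, hi, ht, rfl⟩ := pv_index_decomp T hpos k (by omega)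
  have hgk : (T.flatMap pvExpand1).getD (pvStart T i + t) 0 = (T.getD i (0, 0)).1 :=
    pv_getD_expand T i t hi ht
  have hbase := pv_base_le_F T hpos i hi
  rw [pvS_snd T i hi] at hbase
  have hfoldF := (PySem.List.le_foldl_max (pvLA (pvMapInt T)) 2).2 _
    (pv_mem_LA_F (pvMapInt T) i (by rw [hS]; exact hi))
  by_cases ht1 : 1 ≤ t
  · have hgkm : (T.flatMap pvExpand1).getD (pvStart T i + t - 1) 0 = (T.getD i (0, 0)).1 := by
      rw [show pvStart T i + t - 1 = pvStart T i + (t - 1) from by omega]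
      exact pv_getD_expand T i (t - 1) hi (by omega)
    have hgk1v : (T.flatMap pvExpand1).getD (pvStart T i + t + 1) 0 = (T.getD i (0, 0)).1 := by
      rw [hgk, hgkm] at hbr
      omega
    have ht2 : t + 1 < (T.getD i (0, 0)).2 := by
      by_contra hcon
      have hknext : pvStart T i + t + 1 = pvStart T (i + 1) := by
        rw [pvStart_succ T i hi]; omega
      have hi1 : i + 1 < T.length := by
        apply pv_start_lt T (i + 1)
        omega
      have hgnext := pv_getD_expand T (i + 1) 0 hi1 (pv_cpos T hpos (i + 1) hi1)
      rw [Nat.add_zero, ← hknext] at hgnext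
      have hne := pv_chain_ne T hchain i hi1
      rw [hgk1v] at hgnext
      exact hne hgnext
    have hLrm : pvLr (T.flatMap pvExpand1) (pvStart T i + t - 1) = (t : Int) := by
      rw [show pvStart T i + t - 1 = pvStart T i + (t - 1) from by omega,
        pvLr_seg T hchain hpos i hi (t - 1) (by omega)]
      omega
    rw [hLrm]
    by_cases hin : pvStart T i + t + 2 < (T.flatMap pvExpand1).length ∧
        (T.flatMap pvExpand1).getD (pvStart T i + t + 2) 0
          = (T.flatMap pvExpand1).getD (pvStart T i + t - 1) 0
    · rw [if_pos hin]
      obtain ⟨hin1, hin2⟩ := hin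
      rw [hgkm] at hin2
      have ht3 : t + 2 < (T.getD i (0, 0)).2 := by
        by_contra hcon
        have hknext2 : pvStart T i + t + 2 = pvStart T (i + 1) := by
          rw [pvStart_succ T i hi]; omega
        have hi1 : i + 1 < T.length := by
          apply pv_start_lt T (i + 1)
          omega
        have hgnext := pv_getD_expand T (i + 1) 0 hi1 (pv_cpos T hpos (i + 1) hi1)
        rw [Nat.add_zero, ← hknext2] at hgnext
        have hne := pv_chain_ne T hchain i hi1
        exact hne (hgnext.symm.trans hin2).symm
      have hRr : pvRr (T.flatMap pvExpand1) (pvStart T i + t + 2)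
          = ((T.getD i (0, 0)).2 : Int) - ((t : Int) + 2) := by
        rw [show pvStart T i + t + 2 = pvStart T i + (t + 2) from by omega,
          pvRr_seg T hchain hpos i hi (t + 2) ht3]
        push_cast
        ring
      rw [hRr]
      linarith [hbase, hfoldF]
    · rw [if_neg hin]
      have hc2 : (t : Int) + 2 ≤ ((T.getD i (0, 0)).2 : Int) + 1 := by omega
      linarith [hbase, hfoldF]
  · have ht0 : t = 0 := by omega
    rw [ht0] at hk1 hbr hgk hk ⊢
    simp only [Nat.add_zero] at hk1 hbr hgk hk ⊢
    have hi1 : 1 ≤ i := by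
      by_contra hcon
      have hi0 : i = 0 := by omega
      rw [hi0, pvStart_zero] at hk1
      omega
    have hsm : pvStart T i = pvStart T (i - 1) + (T.getD (i - 1) (0, 0)).2 := by
      have h := pvStart_succ T (i - 1) (by omega)
      rw [show i - 1 + 1 = i from by omega] at h
      exact h
    have hcm := pv_cpos T hpos (i - 1) (by omega)
    have hgkm : (T.flatMap pvExpand1).getD (pvStart T i - 1) 0 = (T.getD (i - 1) (0, 0)).1 := by
      rw [show pvStart T i - 1 = pvStart T (i - 1) + ((T.getD (i - 1) (0, 0)).2 - 1)
        from by omega]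
      exact pv_getD_expand T (i - 1) _ (by omega) (by omega)
    have hnem := pv_chain_ne T hchain (i - 1) (by omega)
    rw [show i - 1 + 1 = i from by omega] at hnem
    by_cases hci : (T.getD i (0, 0)).2 = 1
    case neg =>
      exfalso
      have hg1 : (T.flatMap pvExpand1).getD (pvStart T i + 1) 0 = (T.getD i (0, 0)).1 :=
        pv_getD_expand T i 1 hi (by have := pv_cpos T hpos i hi; omega)
      rw [hgk, hg1, hgkm] at hbr
      exact hnem (by omega)
    case pos =>
      have hknext : pvStart T i + 1 = pvStart T (i + 1) := by
        rw [pvStart_succ T i hi, hci]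
      have hi2 : i + 1 < T.length := by
        apply pv_start_lt T (i + 1)
        omega
      have hg1 : (T.flatMap pvExpand1).getD (pvStart T i + 1) 0 = (T.getD (i + 1) (0, 0)).1 := by
        rw [hknext, ← Nat.add_zero (pvStart T (i + 1))]
        exact pv_getD_expand T (i + 1) 0 hi2 (pv_cpos T hpos (i + 1) hi2)
      rw [hgk, hg1, hgkm] at hbr
      have hwin := pvF_win (pvMapInt T) (pvS_pos T hpos) (i - 1) (by rw [hS]; omega)
      rw [show i - 1 + 1 = i from by omega, show i - 1 + 2 = i + 1 from by omega,
        show i - 1 + 3 = i + 2 from by omega] at hwin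
      have hcond : i + 1 < (pvMapInt T).length ∧ ((pvMapInt T).getD i (0, 0)).2 = 1 ∧
          ((pvMapInt T).getD i (0, 0)).1 + ((pvMapInt T).getD (i + 1) (0, 0)).1
            = 2 * ((pvMapInt T).getD (i - 1) (0, 0)).1 := by
        refine ⟨by rw [hS]; omega, by rw [pvS_snd T i hi]; exact_mod_cast hci, ?_⟩
        rw [pvS_fst T i hi, pvS_fst T (i + 1) hi2, pvS_fst T (i - 1) (by omega)]
        exact hbr
      rw [if_pos hcond] at hwin
      have hin0 : 0 ≤ (if i + 2 < (pvMapInt T).length ∧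
          ((pvMapInt T).getD (i + 1) (0, 0)).2 = 1 ∧
          ((pvMapInt T).getD (i - 1) (0, 0)).1 = ((pvMapInt T).getD (i + 2) (0, 0)).1 then
            ((pvMapInt T).getD (i + 2) (0, 0)).2 else 0) := by
        split_ifs with hsp
        · rw [pvS_snd T (i + 2) (by rw [hS] at hsp; omega)]
          positivity
        · exact le_refl 0
      have hmaxr : pvF (pvMapInt T) (i - 1)
          = ((pvMapInt T).getD (i - 1) (0, 0)).2 + 2 +
            (if i + 2 < (pvMapInt T).length ∧ ((pvMapInt T).getD (i + 1) (0, 0)).2 = 1 ∧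
                ((pvMapInt T).getD (i - 1) (0, 0)).1 = ((pvMapInt T).getD (i + 2) (0, 0)).1 then
              ((pvMapInt T).getD (i + 2) (0, 0)).2 else 0) := by
        rw [hwin]
        exact max_eq_right (by linarith [hin0])
      have hcf := pv_chainF T hchain hpos (i - 1) (by omega)
        (by rw [show i - 1 + 1 = i from by omega]; exact hci)
        (by rw [show i - 1 + 1 = i from by omega, show i - 1 + 2 = i + 1 from by omega]
            exact hbr)
      rw [show i - 1 + 1 = i from by omega, show i - 1 + 2 = i + 1 from by omega,
        show i - 1 + 3 = i + 2 from by omega] at hcf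
      have hLrm : pvLr (T.flatMap pvExpand1) (pvStart T i - 1)
          = ((T.getD (i - 1) (0, 0)).2 : Int) := by
        rw [show pvStart T i - 1 = pvStart T (i - 1) + ((T.getD (i - 1) (0, 0)).2 - 1)
          from by omega,
          pvLr_seg T hchain hpos (i - 1) (by omega) _ (by omega)]
        omega
      rw [hgkm, hLrm, hcf]
      have hfoldF1 := (PySem.List.le_foldl_max (pvLA (pvMapInt T)) 2).2 _
        (pv_mem_LA_F (pvMapInt T) (i - 1) (by rw [hS]; omega))
      rw [hmaxr, pvS_snd T (i - 1) (by omega)] at hfoldF1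
      exact hfoldF1

theorem pv_B3 (T : List (Int × Nat))
    (hchain : List.IsChain (fun a b : Int × Nat => a.1 ≠ b.1) T)
    (hpos : ∀ p ∈ T, 0 < p.2) (k : Nat) (hk : k < (T.flatMap pvExpand1).length - 1) :
    pvY (T.flatMap pvExpand1) k ≤ (pvLA (pvMapInt T)).foldl max 2 := by
  have hlen := pv_expand_length T
  have hS := pvS_len T
  have hinit := (PySem.List.le_foldl_max (pvLA (pvMapInt T)) 2).1
  unfold pvY
  by_cases hc : k + 2 < (T.flatMap pvExpand1).length ∧
      (T.flatMap pvExpand1).getD k 0 + (T.flatMap pvExpand1).getD (k + 1) 0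
        = 2 * (T.flatMap pvExpand1).getD (k + 2) 0
  case neg => rw [if_neg hc]; omega
  rw [if_pos hc]
  obtain ⟨hklen, hbr⟩ := hc
  obtain ⟨i, t, hi, ht, hkd⟩ := pv_index_decomp T hpos (k + 2) (by omega)
  have hgk2 : (T.flatMap pvExpand1).getD (k + 2) 0 = (T.getD i (0, 0)).1 := by
    rw [hkd]; exact pv_getD_expand T i t hi ht
  have hbase := pv_base_le_F T hpos i hi
  rw [pvS_snd T i hi] at hbase
  have hfoldF := (PySem.List.le_foldl_max (pvLA (pvMapInt T)) 2).2 _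
    (pv_mem_LA_F (pvMapInt T) i (by rw [hS]; exact hi))
  by_cases ht1 : 1 ≤ t
  · have hgk1 : (T.flatMap pvExpand1).getD (k + 1) 0 = (T.getD i (0, 0)).1 := by
      rw [show k + 1 = pvStart T i + (t - 1) from by omega]
      exact pv_getD_expand T i (t - 1) hi (by omega)
    have hgk0 : (T.flatMap pvExpand1).getD k 0 = (T.getD i (0, 0)).1 := by
      rw [hgk1, hgk2] at hbr
      omega
    have ht2 : 2 ≤ t := by
      by_contra hcon
      have hkst : k + 1 = pvStart T i := by omega
      have hi1 : 1 ≤ i := by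
        by_contra hcon2
        have hi0 : i = 0 := by omega
        rw [hi0, pvStart_zero] at hkst
        omega
      have hcm := pv_cpos T hpos (i - 1) (by omega)
      have hsm : pvStart T i = pvStart T (i - 1) + (T.getD (i - 1) (0, 0)).2 := by
        have h := pvStart_succ T (i - 1) (by omega)
        rw [show i - 1 + 1 = i from by omega] at h
        exact h
      have hgkm : (T.flatMap pvExpand1).getD k 0 = (T.getD (i - 1) (0, 0)).1 := by
        rw [show k = pvStart T (i - 1) + ((T.getD (i - 1) (0, 0)).2 - 1) from by omega]
        exact pv_getD_expand T (i - 1) _ (by omega) (by omega)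
      have hnem := pv_chain_ne T hchain (i - 1) (by omega)
      rw [show i - 1 + 1 = i from by omega] at hnem
      exact hnem (hgkm.symm.trans hgk0)
    have hRr : pvRr (T.flatMap pvExpand1) (k + 2) = ((T.getD i (0, 0)).2 : Int) - (t : Int) := by
      rw [hkd]
      exact pvRr_seg T hchain hpos i hi t ht
    rw [hRr]
    by_cases hin : 1 ≤ k ∧ (T.flatMap pvExpand1).getD (k - 1) 0
        = (T.flatMap pvExpand1).getD (k + 2) 0
    · rw [if_pos hin]
      obtain ⟨hin1, hin2⟩ := hin
      rw [hgk2] at hin2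
      have ht3 : 3 ≤ t := by
        by_contra hcon
        have hkst : k = pvStart T i := by omega
        have hi1 : 1 ≤ i := by
          by_contra hcon2
          have hi0 : i = 0 := by omega
          rw [hi0, pvStart_zero] at hkst
          omega
        have hcm := pv_cpos T hpos (i - 1) (by omega)
        have hsm : pvStart T i = pvStart T (i - 1) + (T.getD (i - 1) (0, 0)).2 := by
          have h := pvStart_succ T (i - 1) (by omega)
          rw [show i - 1 + 1 = i from by omega] at h
          exact h
        have hgkm : (T.flatMap pvExpand1).getD (k - 1) 0 = (T.getD (i - 1) (0, 0)).1 := by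
          rw [show k - 1 = pvStart T (i - 1) + ((T.getD (i - 1) (0, 0)).2 - 1) from by omega]
          exact pv_getD_expand T (i - 1) _ (by omega) (by omega)
        have hnem := pv_chain_ne T hchain (i - 1) (by omega)
        rw [show i - 1 + 1 = i from by omega] at hnem
        exact hnem (hgkm.symm.trans hin2)
      have hLrm : pvLr (T.flatMap pvExpand1) (k - 1) = (t : Int) - 2 := by
        rw [show k - 1 = pvStart T i + (t - 3) from by omega,
          pvLr_seg T hchain hpos i hi (t - 3) (by omega)]
        omega
      rw [hLrm]
      linarith [hbase, hfoldF]
    · rw [if_neg hin]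
      have hc2 : ((T.getD i (0, 0)).2 : Int) - (t : Int) + 2
          ≤ ((T.getD i (0, 0)).2 : Int) + 1 := by omega
      linarith [hbase, hfoldF]
  · have ht0 : t = 0 := by omega
    have hkd0 : k + 2 = pvStart T i := by omega
    clear hkd
    have hi1 : 1 ≤ i := by
      by_contra hcon
      have hi0 : i = 0 := by omega
      rw [hi0, pvStart_zero] at hkd0
      omega
    have hsm : pvStart T i = pvStart T (i - 1) + (T.getD (i - 1) (0, 0)).2 := by
      have h := pvStart_succ T (i - 1) (by omega)
      rw [show i - 1 + 1 = i from by omega] at h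
      exact h
    have hcm := pv_cpos T hpos (i - 1) (by omega)
    have hgk1 : (T.flatMap pvExpand1).getD (k + 1) 0 = (T.getD (i - 1) (0, 0)).1 := by
      rw [show k + 1 = pvStart T (i - 1) + ((T.getD (i - 1) (0, 0)).2 - 1) from by omega]
      exact pv_getD_expand T (i - 1) _ (by omega) (by omega)
    have hnem := pv_chain_ne T hchain (i - 1) (by omega)
    rw [show i - 1 + 1 = i from by omega] at hnem
    by_cases hcim : (T.getD (i - 1) (0, 0)).2 = 1
    case neg =>
      exfalso
      have hgk0 : (T.flatMap pvExpand1).getD k 0 = (T.getD (i - 1) (0, 0)).1 := by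
        rw [show k = pvStart T (i - 1) + ((T.getD (i - 1) (0, 0)).2 - 2) from by omega]
        exact pv_getD_expand T (i - 1) _ (by omega) (by omega)
      rw [hgk0, hgk1, hgk2] at hbr
      exact hnem (by omega)
    case pos =>
      have hkst : k + 1 = pvStart T (i - 1) := by omega
      have hi2 : 2 ≤ i := by
        by_contra hcon
        have hie : i = 1 := by omega
        rw [hie, show (1 : Nat) - 1 = 0 from rfl, pvStart_zero] at hkst
        omega
      have hsm2 : pvStart T (i - 1) = pvStart T (i - 2) + (T.getD (i - 2) (0, 0)).2 := by
        have h := pvStart_succ T (i - 2) (by omega)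
        rw [show i - 2 + 1 = i - 1 from by omega] at h
        exact h
      have hcm2 := pv_cpos T hpos (i - 2) (by omega)
      have hgk0 : (T.flatMap pvExpand1).getD k 0 = (T.getD (i - 2) (0, 0)).1 := by
        rw [show k = pvStart T (i - 2) + ((T.getD (i - 2) (0, 0)).2 - 1) from by omega]
        exact pv_getD_expand T (i - 2) _ (by omega) (by omega)
      rw [hgk0, hgk1, hgk2] at hbr
      have hwin := pvG_win (pvMapInt T) (pvS_pos T hpos) i (by rw [hS]; exact hi)
      have hcond : 2 ≤ i ∧ ((pvMapInt T).getD (i - 1) (0, 0)).2 = 1 ∧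
          ((pvMapInt T).getD (i - 1) (0, 0)).1 + ((pvMapInt T).getD (i - 2) (0, 0)).1
            = 2 * ((pvMapInt T).getD i (0, 0)).1 := by
        refine ⟨hi2, by rw [pvS_snd T (i - 1) (by omega)]; exact_mod_cast hcim, ?_⟩
        rw [pvS_fst T (i - 1) (by omega), pvS_fst T (i - 2) (by omega), pvS_fst T i hi]
        omega
      rw [if_pos hcond] at hwin
      have hin0 : 0 ≤ (if 3 ≤ i ∧ ((pvMapInt T).getD (i - 2) (0, 0)).2 = 1 ∧
          ((pvMapInt T).getD i (0, 0)).1 = ((pvMapInt T).getD (i - 3) (0, 0)).1 then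
            ((pvMapInt T).getD (i - 3) (0, 0)).2 else 0) := by
        split_ifs with hsp
        · rw [pvS_snd T (i - 3) (by omega)]
          positivity
        · exact le_refl 0
      have hmaxr : pvG (pvMapInt T) i
          = ((pvMapInt T).getD i (0, 0)).2 + 2 +
            (if 3 ≤ i ∧ ((pvMapInt T).getD (i - 2) (0, 0)).2 = 1 ∧
                ((pvMapInt T).getD i (0, 0)).1 = ((pvMapInt T).getD (i - 3) (0, 0)).1 then
              ((pvMapInt T).getD (i - 3) (0, 0)).2 else 0) := by
        rw [hwin]
        exact max_eq_right (by linarith [hin0])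
      have hRr0 : pvRr (T.flatMap pvExpand1) (k + 2) = ((T.getD i (0, 0)).2 : Int) := by
        have h := pvRr_seg T hchain hpos i hi 0 (by omega)
        rw [Nat.add_zero] at h
        rw [hkd0, h]
        omega
      rw [hRr0, hgk2]
      have hchG := pv_chainG T hchain hpos i k hi hi2 hcim (by omega) hkst
      rw [hchG]
      have hfoldG := (PySem.List.le_foldl_max (pvLA (pvMapInt T)) 2).2 _
        (pv_mem_LA_G (pvMapInt T) i (by rw [hS]; exact hi))
      rw [hmaxr, pvS_snd T i hi] at hfoldG
      exact hfoldG

theorem pv_core (T : List (Int × Nat))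
    (hchain : List.IsChain (fun a b : Int × Nat => a.1 ≠ b.1) T)
    (hpos : ∀ p ∈ T, 0 < p.2) :
    (pvLA (pvMapInt T)).foldl max 2 = (pvLB (T.flatMap pvExpand1)).foldl max 2 := by
  apply pv_foldl_max_eq
  · intro x hx
    obtain ⟨j, hj, hx2⟩ := List.mem_flatMap.mp hx
    have hjT : j < T.length := by rw [← pvS_len T]; exact List.mem_range.mp hj
    simp only [List.mem_cons, List.not_mem_nil, or_false] at hx2
    rcases hx2 with rfl | rfl
    · exact pv_A1 T hchain hpos j hjT
    · exact pv_A2 T hchain hpos j hjT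
  · intro x hx
    rcases List.mem_append.mp hx with h | h
    · obtain ⟨k, hk, rfl⟩ := List.mem_map.mp h
      exact pv_B1 T hchain hpos k (List.mem_range.mp hk)
    · obtain ⟨k, hk, hx2⟩ := List.mem_flatMap.mp h
      have hkT := List.mem_range.mp hk
      simp only [List.mem_cons, List.not_mem_nil, or_false] at hx2
      rcases hx2 with rfl | rfl
      · exact pv_B2 T hchain hpos k hkT
      · exact pv_B3 T hchain hpos k hkT

-- ---------- A's loop body, rewritten to pvF / pvG ----------

theorem pv_forA_eq (S : List (Int × Int)) (hpos : ∀ x ∈ S, 1 ≤ x.2) (j : Nat)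
    (hj : j < S.length) :
    max ((pvGetS S j).2 + 1)
      (if (j : Int) + 2 < (S.length : Int) ∧ (pvGetS S ((j : Int) + 1)).2 = 1 ∧
          (pvGetS S ((j : Int) + 1)).1 + (pvGetS S ((j : Int) + 2)).1 = 2 * (pvGetS S (j : Int)).1 then
        (pvGetS S (j : Int)).2 + 2 +
          (if (j : Int) + 3 < (S.length : Int) ∧ (pvGetS S ((j : Int) + 2)).2 = 1 ∧
              (pvGetS S (j : Int)).1 = (pvGetS S ((j : Int) + 3)).1 then
            (pvGetS S ((j : Int) + 3)).2
           else 0)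
       else 0)
    = pvF S j := by
  have hc0 : 1 ≤ (S[j]'hj).2 := hpos _ (S.getElem_mem hj)
  have hrest : ∀ x ∈ S.drop (j + 1), 1 ≤ x.2 := fun x hx => hpos x (List.mem_of_mem_drop hx)
  rw [pvF, List.getD_eq_getElem S (0, 0) hj,
    ← pv_score_core (S[j]'hj).1 (S[j]'hj).2 (S.drop (j + 1)) hc0 hrest]
  have e1 : (j : Int) + 1 = ((j + 1 : Nat) : Int) := by push_cast; ring
  have e2 : (j : Int) + 2 = ((j + 2 : Nat) : Int) := by push_cast; ring
  have e3 : (j : Int) + 3 = ((j + 3 : Nat) : Int) := by push_cast; ring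
  have g2 : (2 ≤ (S.drop (j + 1)).length) = ((j : Int) + 2 < (S.length : Int)) :=
    propext (by rw [List.length_drop]; omega)
  have g3 : (3 ≤ (S.drop (j + 1)).length) = ((j : Int) + 3 < (S.length : Int)) :=
    propext (by rw [List.length_drop]; omega)
  have n1 : j + 1 + 0 = j + 1 := by omega
  have n2 : j + 1 + 1 = j + 2 := by omega
  have n3 : j + 1 + 2 = j + 3 := by omega
  simp only [pvGetS, e1, e2, e3, PySem.List.pyGetD_natCast, pv_getD_drop, g2, g3, n1, n2, n3,
    List.getD_eq_getElem S (0, 0) hj]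

theorem pv_backA_eq (S : List (Int × Int)) (hpos : ∀ x ∈ S, 1 ≤ x.2) (j : Nat)
    (hj : j < S.length) :
    max ((pvGetS S j).2 + 1)
      (if 1 < (j : Int) ∧ (pvGetS S ((j : Int) - 1)).2 = 1 ∧
          (pvGetS S ((j : Int) - 1)).1 + (pvGetS S ((j : Int) - 2)).1 = 2 * (pvGetS S (j : Int)).1 then
        (pvGetS S (j : Int)).2 + 2 +
          (if 2 < (j : Int) ∧ (pvGetS S ((j : Int) - 2)).2 = 1 ∧
              (pvGetS S (j : Int)).1 = (pvGetS S ((j : Int) - 3)).1 then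
            (pvGetS S ((j : Int) - 3)).2
           else 0)
       else 0)
    = pvG S j := by
  rw [pvG, List.getD_eq_getElem S (0, 0) hj,
    ← pv_score_core (S[j]'hj).1 (S[j]'hj).2 ((S.take j).reverse)
      (hpos _ (S.getElem_mem hj))
      (fun x hx => hpos x (List.mem_of_mem_take (List.mem_reverse.mp hx)))]
  have hg2 : (2 ≤ ((S.take j).reverse).length) = (1 < (j : Int)) :=
    propext (by simp [List.length_take]; omega)
  have hg3 : (3 ≤ ((S.take j).reverse).length) = (2 < (j : Int)) :=
    propext (by simp [List.length_take]; omega)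
  by_cases h2 : 2 ≤ j
  · have e1 : (j : Int) - 1 = ((j - 1 : Nat) : Int) := by omega
    have e2 : (j : Int) - 2 = ((j - 2 : Nat) : Int) := by omega
    have r0 := pv_getD_take_rev S j 0 (by omega) (le_of_lt hj)
    have r1 := pv_getD_take_rev S j 1 (by omega) (le_of_lt hj)
    have n0 : j - 1 - 0 = j - 1 := by omega
    have n1 : j - 1 - 1 = j - 2 := by omega
    by_cases h3 : 3 ≤ j
    · have e3 : (j : Int) - 3 = ((j - 3 : Nat) : Int) := by omega
      have r2 := pv_getD_take_rev S j 2 (by omega) (le_of_lt hj)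
      have n2 : j - 1 - 2 = j - 3 := by omega
      simp only [pvGetS, e1, e2, e3, PySem.List.pyGetD_natCast, r0, r1, r2, n0, n1, n2,
        hg2, hg3, List.getD_eq_getElem S (0, 0) hj]
    · have hno : ¬ (2 < (j : Int)) := by omega
      have hins : ∀ (p q : Prop), ((2 < (j : Int)) ∧ p ∧ q) = False :=
        fun p q => eq_false (fun h => hno h.1)
      simp only [pvGetS, e1, e2, PySem.List.pyGetD_natCast, r0, r1, n0, n1,
        hg2, hg3, List.getD_eq_getElem S (0, 0) hj, hins, if_false]
  · have hno : ¬ (1 < (j : Int)) := by omega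
    have hins : ∀ (p q : Prop), ((1 < (j : Int)) ∧ p ∧ q) = False :=
      fun p q => eq_false (fun h => hno h.1)
    simp only [pvGetS, hg2, hg3, PySem.List.pyGetD_natCast,
      List.getD_eq_getElem S (0, 0) hj, hins, if_false]


theorem pvB_body (dl : List Int) (k : Nat) (hk : k < dl.length - 1) (b : Int) (hb : 2 ≤ b) :
    (let s := PySem.List.pyGetD dl (↑k) 0 + PySem.List.pyGetD dl ((↑k : Int) + 1) 0
     let best :=
       if 1 ≤ (↑k : Int) ∧ s = 2 * PySem.List.pyGetD dl ((↑k : Int) - 1) 0 then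
         max b (PySem.List.pyGetD (pvRuns dl) ((↑k : Int) - 1) 0 + 2 +
           (if (↑k : Int) + 2 < (dl.length : Int) ∧
               PySem.List.pyGetD dl ((↑k : Int) + 2) 0
                 = PySem.List.pyGetD dl ((↑k : Int) - 1) 0 then
             PySem.List.pyGetD ((pvRuns dl.reverse).reverse) ((↑k : Int) + 2) 0 else 0))
       else b
     if (↑k : Int) + 2 < (dl.length : Int) ∧ s = 2 * PySem.List.pyGetD dl ((↑k : Int) + 2) 0 then
       max best (PySem.List.pyGetD ((pvRuns dl.reverse).reverse) ((↑k : Int) + 2) 0 + 2 +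
         (if 1 ≤ (↑k : Int) ∧ PySem.List.pyGetD dl ((↑k : Int) - 1) 0
             = PySem.List.pyGetD dl ((↑k : Int) + 2) 0 then
           PySem.List.pyGetD (pvRuns dl) ((↑k : Int) - 1) 0 else 0))
     else best)
    = max (max b (pvX dl k)) (pvY dl k) := by
  have hmb : max b 2 = b := max_eq_left hb
  have q1 : (1 ≤ (k : Int)) ↔ (1 ≤ k) := by omega
  have q2 : ((k : Int) + 2 < (dl.length : Int)) ↔ (k + 2 < dl.length) := by omega
  have e0 : PySem.List.pyGetD dl (↑k) 0 = dl.getD k 0 := PySem.List.pyGetD_natCast dl k 0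
  have e1 : PySem.List.pyGetD dl ((↑k : Int) + 1) 0 = dl.getD (k + 1) 0 := by
    rw [show ((k : Int) + 1) = ((k + 1 : Nat) : Int) from by push_cast; ring,
      PySem.List.pyGetD_natCast]
  have e2 : PySem.List.pyGetD dl ((↑k : Int) + 2) 0 = dl.getD (k + 2) 0 := by
    rw [show ((k : Int) + 2) = ((k + 2 : Nat) : Int) from by push_cast; ring,
      PySem.List.pyGetD_natCast]
  have e6 : PySem.List.pyGetD ((pvRuns dl.reverse).reverse) ((↑k : Int) + 2) 0
      = ((pvRuns dl.reverse).reverse).getD (k + 2) 0 := by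
    rw [show ((k : Int) + 2) = ((k + 2 : Nat) : Int) from by push_cast; ring,
      PySem.List.pyGetD_natCast]
  unfold pvX pvY
  by_cases h1 : 1 ≤ k
  · have e3 : ((k : Int) - 1) = ((k - 1 : Nat) : Int) := by omega
    have e4 : PySem.List.pyGetD dl ((↑k : Int) - 1) 0 = dl.getD (k - 1) 0 := by
      rw [e3, PySem.List.pyGetD_natCast]
    have e5 : PySem.List.pyGetD (pvRuns dl) ((↑k : Int) - 1) 0 = pvLr dl (k - 1) := by
      rw [e3, PySem.List.pyGetD_natCast, pvRuns_getD dl (k - 1) (by omega)]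
    by_cases h2 : k + 2 < dl.length
    · have e7 : ((pvRuns dl.reverse).reverse).getD (k + 2) 0 = pvRr dl (k + 2) :=
        pvRight_getD dl (k + 2) h2
      simp only [e0, e1, e2, e4, e5, e6, e7, q1, q2]
      by_cases hc1 : 1 ≤ k ∧ dl.getD k 0 + dl.getD (k + 1) 0 = 2 * dl.getD (k - 1) 0
      · by_cases hc2 : k + 2 < dl.length ∧
            dl.getD k 0 + dl.getD (k + 1) 0 = 2 * dl.getD (k + 2) 0
        · simp only [if_pos hc1, if_pos hc2]
        · simp only [if_pos hc1, if_neg hc2]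
          exact (max_eq_left (le_trans hb (le_max_left _ _))).symm
      · by_cases hc2 : k + 2 < dl.length ∧
            dl.getD k 0 + dl.getD (k + 1) 0 = 2 * dl.getD (k + 2) 0
        · simp only [if_neg hc1, if_pos hc2, hmb]
        · simp only [if_neg hc1, if_neg hc2, hmb]
    · have hnoL : ((k : Int) + 2 < (dl.length : Int)) = False := eq_false (by omega)
      have hnoN : (k + 2 < dl.length) = False := eq_false (by omega)
      simp only [e0, e1, e2, e4, e5, q1, hnoL, hnoN, false_and, if_false]
      by_cases hc1 : 1 ≤ k ∧ dl.getD k 0 + dl.getD (k + 1) 0 = 2 * dl.getD (k - 1) 0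
      · simp only [if_pos hc1]
        exact (max_eq_left (le_trans hb (le_max_left _ _))).symm
      · simp only [if_neg hc1, hmb]
  · have hno1L : (1 ≤ (k : Int)) = False := eq_false (by omega)
    have hno1N : (1 ≤ k) = False := eq_false (by omega)
    simp only [e0, e1, e2, e6, hno1L, hno1N, false_and, if_false]
    by_cases h2 : k + 2 < dl.length
    · have e7 : ((pvRuns dl.reverse).reverse).getD (k + 2) 0 = pvRr dl (k + 2) :=
        pvRight_getD dl (k + 2) h2
      simp only [e7, q2, hmb]
      by_cases hc2 : k + 2 < dl.length ∧
          dl.getD k 0 + dl.getD (k + 1) 0 = 2 * dl.getD (k + 2) 0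
      · simp only [if_pos hc2]
      · simp only [if_neg hc2, hmb]
    · have hnoL : ((k : Int) + 2 < (dl.length : Int)) = False := eq_false (by omega)
      have hnoN : (k + 2 < dl.length) = False := eq_false (by omega)
      simp only [hnoL, hnoN, false_and, if_false, hmb]

theorem pvAflush (dl : List Int) (hne : dl ≠ []) :
    (dl.foldl pvRleStepA (0, none, [])).2.2 ++
      [((dl.foldl pvRleStepA (0, none, [])).2.1.getD 0, (dl.foldl pvRleStepA (0, none, [])).1)]
    = pvMapInt (pvRle dl) := by
  cases dl with
  | nil => exact absurd rfl hne
  | cons d t => rw [pv_rle_eq d t, pvRleFold_eq]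

theorem get_longest_spec : Claim_equal_get_longest := by
  intro arr n _hdom hpre
  unfold Spec_get_longest get_longest get_longest_alt
  by_cases hn : n ≤ 3
  · simp [hn]
  · have h4 : 3 < n := by omega
    have hlen : n ≤ (arr.length : Int) := hpre h4
    rw [if_neg hn, if_neg hn]
    dsimp only
    simp only [pvGetI]
    set dl := (PySem.List.pyRange 0 (n - 1) 1).map
      (fun i => PySem.List.pyGetD arr i 0 - PySem.List.pyGetD arr (i + 1) 0) with hdl
    have hmlen : (dl.length : Int) = n - 1 := by
      rw [hdl]
      simp [PySem.List.length_pyRange_one]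
      omega
    have hne : dl ≠ [] := by
      intro hE
      rw [hE] at hmlen
      simp at hmlen
      omega
    rw [show n - 1 = (dl.length : Int) from hmlen.symm]
    rw [PySem.List.foldl_pyRange_zero_pyGetD' dl 0 pvRleStepA (0, none, [])]
    rw [pvAflush dl hne]
    rw [PySem.List.pyRange_zero_nat (pvMapInt (pvRle dl)).length]
    rw [PySem.List.pyRange_zero_nat dl.length]
    rw [show (dl.length : Int) - 1 = ((dl.length - 1 : Nat) : Int) from by omega,
      PySem.List.pyRange_zero_nat (dl.length - 1)]
    rw [List.foldl_map, List.foldl_map, List.foldl_map]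
    have hposS : ∀ x ∈ pvMapInt (pvRle dl), 1 ≤ x.2 := pvS_pos _ (pvRle_pos dl)
    rw [PySem.List.foldl_congr_mem (List.range (pvMapInt (pvRle dl)).length) _
      (fun b j => max (max b (pvF (pvMapInt (pvRle dl)) j)) (pvG (pvMapInt (pvRle dl)) j)) 2
      (fun b j hj => by
        rw [pv_forA_eq _ hposS j (List.mem_range.mp hj),
          pv_backA_eq _ hposS j (List.mem_range.mp hj)])]
    rw [pv_foldl_two]
    rw [PySem.List.foldl_congr_mem (List.range dl.length) _
      (fun b k => max b (pvLr dl k + 1)) 2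
      (fun b k hk => by
        rw [PySem.List.pyGetD_natCast, pvRuns_getD dl k (List.mem_range.mp hk)])]
    rw [show (List.range dl.length).foldl (fun b k => max b (pvLr dl k + 1)) 2
      = ((List.range dl.length).map (fun k => pvLr dl k + 1)).foldl max 2 from
      List.foldl_map.symm]
    rw [pv_foldl_inv_congr (fun b : Int => 2 ≤ b) _
      (fun b k => max (max b (pvX dl k)) (pvY dl k)) (List.range (dl.length - 1)) _
      (PySem.List.le_foldl_max _ 2).1
      (fun b k hk hb => pvB_body dl k (List.mem_range.mp hk) b hb)
      (fun b k hb => le_trans hb (le_trans (le_max_left _ _) (le_max_left _ _)))]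
    rw [pv_foldl_two]
    rw [← List.foldl_append]
    have hcore := pv_core (pvRle dl) (pvRle_chain dl) (pvRle_pos dl)
    rw [pvRle_expand dl] at hcore
    rw [show ((List.range (pvMapInt (pvRle dl)).length).flatMap
        (fun j => [pvF (pvMapInt (pvRle dl)) j, pvG (pvMapInt (pvRle dl)) j]))
      = pvLA (pvMapInt (pvRle dl)) from rfl]
    rw [show ((List.range dl.length).map (fun k => pvLr dl k + 1) ++
        (List.range (dl.length - 1)).flatMap (fun k => [pvX dl k, pvY dl k])) = pvLB dl from rfl]
    rw [hcore]
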